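-- pv_equiv track=rewrite | github.com/cong2738/PumpK | 프로그래머스/lv.2/리코쳇 로봇.py | solution
-- ===== SOURCE A (Python) =====
-- from collections import deque
--
-- def find_robo(board):
--     for y,line in enumerate(board):
--         for x,c in enumerate(line):
--             if c == 'R': return x,y
--
-- def solution(board):
--     move = ((1,0),(-1,0),(0,1),(0,-1))
--     LX,LY = len(board[0]), len(board)
--     robo = find_robo(board)
--
--     visited = [[0]*(LX) for _ in range(LY)]
--     visited[robo[1]][robo[0]] = 1
--
--     Q = deque([robo])
--     while Q:
--         x,y = Q.popleft()
--         if board[y][x] == 'G': return visited[y][x] - 1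
--
--         for dx,dy in move:
--             nx,ny = x,y
--             while 0 <= nx + dx < LX and 0 <= ny + dy < LY and board[ny+dy][nx+dx] != 'D':
--                 nx += dx
--                 ny += dy
--
--             if not visited[ny][nx]:
--                 visited[ny][nx] = visited[y][x] + 1
--                 Q. append((nx,ny))
--
--     return -1
-- ===== SOURCE B (Python) =====
-- def solution(board):
--     LX, LY = len(board[0]), len(board)
--     ry, rx = next((y, row.index('R')) for y, row in enumerate(board) if 'R' in row)
--     INF = LX * LY + 1
--     dist = [[INF] * LX for _ in range(LY)]
--     dist[ry][rx] = 0
--     changed = True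
--     while changed:
--         changed = False
--         for y in range(LY):
--             for x in range(LX):
--                 if dist[y][x] < INF:
--                     for dx, dy in ((1, 0), (-1, 0), (0, 1), (0, -1)):
--                         nx, ny = x, y
--                         while 0 <= nx + dx < LX and 0 <= ny + dy < LY and board[ny + dy][nx + dx] != 'D':
--                             nx += dx
--                             ny += dy
--                         if dist[y][x] + 1 < dist[ny][nx]:
--                             dist[ny][nx] = dist[y][x] + 1
--                             changed = True
--     best = INF
--     for y in range(LY):
--         for x in range(LX):
--             if board[y][x] == 'G' and dist[y][x] < best:
--                 best = dist[y][x]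
--     return best if best < INF else -1
-- ===== Notes on version B (the rewrite author's own statement) =====
-- stated objective: alternative
-- what changed: Replaces A's queue-based BFS (deque plus distance-labelled visited grid, goal test on pop) by Bellman-Ford-style fixpoint iteration: a distance grid initialised to INF with 0 at the robot is repeatedly relaxed over every cell (same slide moves) until a full pass changes nothing, and the answer is the minimum distance found on a 'G' cell, or -1 if that minimum is still INF.
-- outside the precondition, e.g. on solution(['RG', 'D']): A returns 1, B raises IndexError
import Mathlib
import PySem

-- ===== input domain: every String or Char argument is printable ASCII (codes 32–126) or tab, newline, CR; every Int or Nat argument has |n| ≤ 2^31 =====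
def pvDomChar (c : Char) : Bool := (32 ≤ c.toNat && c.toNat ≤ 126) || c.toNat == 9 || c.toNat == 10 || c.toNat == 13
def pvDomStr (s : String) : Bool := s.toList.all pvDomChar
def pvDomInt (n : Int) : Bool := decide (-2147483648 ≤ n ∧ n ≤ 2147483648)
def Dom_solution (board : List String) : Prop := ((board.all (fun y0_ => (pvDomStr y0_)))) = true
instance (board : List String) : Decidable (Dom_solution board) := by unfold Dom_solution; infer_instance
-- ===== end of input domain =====

-- B replaces A's deque-and-distance-grid BFS by Bellman-Ford-style fixpoint relaxation:
-- a distance grid (INF everywhere, 0 at the robot) is relaxed over every cell with the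
-- same slide moves until a full pass changes nothing; the answer is the minimum distance
-- on a 'G' cell, or -1 if none is below INF.  Same return value on Pre_; not faster.

-- Nested-list grid helpers shared by the two ports (Python's grid[y][x] read/write, a
-- cell counter and a cell sum used only for the termination measures of the loops).
def pvGridGet {α : Type} (d : α) (v : List (List α)) (i j : Nat) : α := (v.getD j []).getD i d
def pvGridSet {α : Type} (v : List (List α)) (i j : Nat) (k : α) : List (List α) :=
  v.set j ((v.getD j []).set i k)
def pvGridCount {α : Type} (p : α → Bool) (v : List (List α)) : Nat := (v.map (List.countP p)).sum
def pvGridSum (v : List (List Nat)) : Nat := (v.map List.sum).sum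

-- Termination helper lemmas (cited by the ports' decreasing_by): overwriting a cell
-- strictly decreases the matching count / the grid sum.
theorem pvGridGet_ne_default_inbounds {α : Type} {d : α} {v : List (List α)} {i j : Nat}
    (h : pvGridGet d v i j ≠ d) : j < v.length ∧ i < (v.getD j []).length := by
  unfold pvGridGet at h
  constructor
  · by_contra hj
    rw [List.getD_eq_default _ _ (Nat.le_of_not_lt hj)] at h
    simp [List.getD] at h
  · by_contra hi
    rw [List.getD_eq_default _ _ (Nat.le_of_not_lt hi)] at h
    exact h rfl

theorem pvCountP_set {α : Type} (p : α → Bool) :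
    ∀ (r : List α) (i : Nat) (k d : α), i < r.length → p (r.getD i d) = true → p k = false →
      (r.set i k).countP p + 1 = r.countP p := by
  intro r
  induction r with
  | nil => intro i k d h _ _; simp at h
  | cons a t ih =>
    intro i k d h hp hk
    cases i with
    | zero => simp [List.getD] at hp; simp [hp, hk]
    | succ n =>
      simp only [List.length_cons, Nat.succ_lt_succ_iff] at h
      have := ih n k d h (by simpa [List.getD] using hp) hk
      simp [List.countP_cons, List.set]
      split <;> omega

theorem pvGridCount_set {α : Type} {d : α} {p : α → Bool} :
    ∀ (v : List (List α)) (i j : Nat) (k : α),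
      pvGridGet d v i j ≠ d → p (pvGridGet d v i j) = true → p k = false →
      pvGridCount p (pvGridSet v i j k) + 1 = pvGridCount p v := by
  intro v
  induction v with
  | nil => intro i j k h _ _; exact absurd (by simp [pvGridGet, List.getD]) h
  | cons r t ih =>
    intro i j k h hp hk
    cases j with
    | zero =>
      have hin := (pvGridGet_ne_default_inbounds h).2
      simp only [List.getD_cons_zero] at hin
      simp only [pvGridGet, List.getD_cons_zero] at hp
      simp only [pvGridSet, List.getD_cons_zero, List.set_cons_zero, pvGridCount, List.map_cons,
        List.sum_cons]
      have := pvCountP_set p r i k d hin hp hk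
      omega
    | succ n =>
      have h' : pvGridGet d t i n ≠ d := by simpa [pvGridGet, List.getD] using h
      have hp' : p (pvGridGet d t i n) = true := by simpa [pvGridGet, List.getD] using hp
      have := ih i n k h' hp' hk
      simp only [pvGridSet, List.getD_cons_succ, List.set_cons_succ, pvGridCount, List.map_cons,
        List.sum_cons] at *
      omega

theorem pvRowSum_set :
    ∀ (r : List Nat) (i k : Nat), i < r.length → (r.set i k).sum + r.getD i 0 = r.sum + k := by
  intro r
  induction r with
  | nil => intro i k h; simp at h
  | cons a t ih =>
    intro i k h
    cases i with
    | zero => simp [List.getD]; omega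
    | succ n =>
      simp only [List.length_cons, Nat.succ_lt_succ_iff] at h
      have := ih n k h
      simp only [List.set_cons_succ, List.sum_cons, List.getD_cons_succ]
      omega

theorem pvGridSum_set :
    ∀ (v : List (List Nat)) (i j k : Nat), j < v.length → i < (v.getD j []).length →
      pvGridSum (pvGridSet v i j k) + pvGridGet 0 v i j = pvGridSum v + k := by
  intro v
  induction v with
  | nil => intro i j k h _; simp at h
  | cons r t ih =>
    intro i j k hj hi
    cases j with
    | zero =>
      simp only [List.getD_cons_zero] at hi
      simp only [pvGridSet, pvGridSum, pvGridGet, List.getD_cons_zero, List.set_cons_zero,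
        List.map_cons, List.sum_cons]
      have := pvRowSum_set r i k hi
      omega
    | succ n =>
      simp only [List.length_cons, Nat.succ_lt_succ_iff] at hj
      simp only [List.getD_cons_succ] at hi
      have hrec := ih i n k hj hi
      simp only [pvGridSet, pvGridSum, pvGridGet] at hrec
      simp only [pvGridSet, pvGridSum, pvGridGet, List.getD_cons_succ, List.set_cons_succ,
        List.map_cons, List.sum_cons]
      omega

-- ===== PORT A =====
def find_robo (board : List String) : Option (Int × Int) :=
  (PySem.List.enumerate board 0).findSome? (fun yl =>
    (PySem.List.enumerate yl.2.toList 0).findSome? (fun xc =>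
      if xc.2 = 'R' then some (xc.1, yl.1) else none))

def boardAtA (board : List String) (x y : Int) : Char :=
  ((board.getD y.toNat "").toList.getD x.toNat ' ')

def movesA : List (Int × Int) := [(1,0),(-1,0),(0,1),(0,-1)]

def vgetA (v : List (List Nat)) (x y : Int) : Nat := pvGridGet 1 v x.toNat y.toNat
def vsetA (v : List (List Nat)) (x y : Int) (k : Nat) : List (List Nat) :=
  pvGridSet v x.toNat y.toNat k
def zerosA (v : List (List Nat)) : Nat := pvGridCount (· == 0) v

-- the inner `while` slide; the fuel is an upper bound on the number of steps, the
-- guard is exactly Python's condition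
def slideFuelA (LX LY nx ny : Int) : Nat := (LX + LY).toNat + nx.natAbs + ny.natAbs + 1

def slideA (board : List String) (LX LY dx dy : Int) : Nat → Int → Int → Int × Int
  | 0, nx, ny => (nx, ny)
  | fuel+1, nx, ny =>
    if 0 ≤ nx + dx ∧ nx + dx < LX ∧ 0 ≤ ny + dy ∧ ny + dy < LY ∧
       boardAtA board (nx+dx) (ny+dy) ≠ 'D' then
      slideA board LX LY dx dy fuel (nx+dx) (ny+dy)
    else (nx, ny)

-- the body of A's `for dx,dy in move` loop: returns (updated visited, cells appended to Q)
def expandA (board : List String) (LX LY x y : Int) (v : List (List Nat)) :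
    List (List Nat) × List (Int × Int) :=
  movesA.foldl (fun s m =>
    let t := slideA board LX LY m.1 m.2 (slideFuelA LX LY x y) x y
    if vgetA s.1 t.1 t.2 = 0 then (vsetA s.1 t.1 t.2 (vgetA s.1 x y + 1), s.2 ++ [t]) else s)
    (v, [])

theorem pvFoldMeasureA (board : List String) (LX LY x y : Int) :
    ∀ (ms : List (Int × Int)) (s : List (List Nat) × List (Int × Int)),
      zerosA (ms.foldl (fun s m =>
        let t := slideA board LX LY m.1 m.2 (slideFuelA LX LY x y) x y
        if vgetA s.1 t.1 t.2 = 0 then (vsetA s.1 t.1 t.2 (vgetA s.1 x y + 1), s.2 ++ [t]) else s) s).1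
      + (ms.foldl (fun s m =>
        let t := slideA board LX LY m.1 m.2 (slideFuelA LX LY x y) x y
        if vgetA s.1 t.1 t.2 = 0 then (vsetA s.1 t.1 t.2 (vgetA s.1 x y + 1), s.2 ++ [t]) else s) s).2.length
      ≤ zerosA s.1 + s.2.length := by
  intro ms
  induction ms with
  | nil => intro s; simp
  | cons m rest ih =>
    intro s
    simp only [List.foldl_cons]
    refine le_trans (ih _) ?_
    try dsimp only
    by_cases hg : vgetA s.1 (slideA board LX LY m.1 m.2 (slideFuelA LX LY x y) x y).1
        (slideA board LX LY m.1 m.2 (slideFuelA LX LY x y) x y).2 = 0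
    · have hg' : pvGridGet 1 s.1 (slideA board LX LY m.1 m.2 (slideFuelA LX LY x y) x y).1.toNat
          (slideA board LX LY m.1 m.2 (slideFuelA LX LY x y) x y).2.toNat = 0 := hg
      have hz := pvGridCount_set (d := 1) (p := (· == 0)) s.1 _ _ (vgetA s.1 x y + 1)
        (by rw [hg']; omega) (by rw [hg']; rfl) (by simp)
      rw [if_pos hg]
      simp only [zerosA, vsetA, List.length_append, List.length_cons, List.length_nil] at *
      omega
    · simp [hg]

theorem expandA_measure (board : List String) (LX LY x y : Int) (v : List (List Nat)) :
    zerosA (expandA board LX LY x y v).1 + (expandA board LX LY x y v).2.length ≤ zerosA v := by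
  simpa using pvFoldMeasureA board LX LY x y movesA (v, [])

def loopA (board : List String) (LX LY : Int) : List (Int × Int) → List (List Nat) → Int
  | [], _ => -1
  | c :: Q, v =>
    if boardAtA board c.1 c.2 = 'G' then (vgetA v c.1 c.2 : Int) - 1
    else loopA board LX LY (Q ++ (expandA board LX LY c.1 c.2 v).2) (expandA board LX LY c.1 c.2 v).1
termination_by Q v => zerosA v + Q.length
decreasing_by
  have := expandA_measure board LX LY c.1 c.2 v
  simp only [List.length_append, List.length_cons]
  omega

def solution (board : List String) : Int :=
  let LX : Int := PySem.Str.len (board.getD 0 "")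
  let LY : Int := (board.length : Int)
  match find_robo board with
  | none => -1   -- Python A raises here (None subscription); excluded by Pre_solution
  | some robo =>
    loopA board LX LY [robo]
      (vsetA (List.replicate LY.toNat (List.replicate LX.toNat 0)) robo.1 robo.2 1)

-- ===== PORT B =====
-- Source B: next((y, row.index('R')) for y, row in enumerate(board) if 'R' in row)
def bfFind (board : List String) : Option (Int × Int) :=
  (PySem.List.enumerate board 0).findSome? (fun yl =>
    if 'R' ∈ yl.2.toList then
      some (yl.1, (((PySem.List.index? yl.2.toList 'R').getD 0 : Nat) : Int))
    else none)

def boardAtB (board : List String) (x y : Int) : Char :=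
  ((board.getD y.toNat "").toList.getD x.toNat ' ')

def movesB : List (Int × Int) := [(1,0),(-1,0),(0,1),(0,-1)]

def slideFuelB (LX LY nx ny : Int) : Nat := (LX + LY).toNat + nx.natAbs + ny.natAbs + 1

-- Source B's inner `while` slide loop, identical to A's
def slideB (board : List String) (LX LY dx dy : Int) : Nat → Int → Int → Int × Int
  | 0, nx, ny => (nx, ny)
  | fuel+1, nx, ny =>
    if 0 ≤ nx + dx ∧ nx + dx < LX ∧ 0 ≤ ny + dy ∧ ny + dy < LY ∧
       boardAtB board (nx+dx) (ny+dy) ≠ 'D' then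
      slideB board LX LY dx dy fuel (nx+dx) (ny+dy)
    else (nx, ny)

-- dist[y][x] read/write (values are Python non-negative ints, held as Nat)
def dgetB (g : List (List Nat)) (x y : Int) : Nat := pvGridGet 0 g x.toNat y.toNat
def dsetB (g : List (List Nat)) (x y : Int) (k : Nat) : List (List Nat) :=
  pvGridSet g x.toNat y.toNat k

-- the nested `for y in range(LY): for x in range(LX)` scan, flattened into the one
-- iteration sequence Python performs
def bfScan (LXn LYn : Nat) : List (Int × Int) :=
  (List.range LYn).flatMap (fun y : Nat =>
    (List.range LXn).map (fun x : Nat => ((x : Int), (y : Int))))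

-- body of the scan for one cell p: the guarded relaxation of p's four slide targets
def bfRelax (board : List String) (LX LY : Int) (INF : Nat) (p : Int × Int)
    (s : List (List Nat) × Bool) : List (List Nat) × Bool :=
  if dgetB s.1 p.1 p.2 < INF then
    movesB.foldl (fun s2 m =>
      let t := slideB board LX LY m.1 m.2 (slideFuelB LX LY p.1 p.2) p.1 p.2
      if dgetB s2.1 p.1 p.2 + 1 < dgetB s2.1 t.1 t.2 then
        (dsetB s2.1 t.1 t.2 (dgetB s2.1 p.1 p.2 + 1), true)
      else s2) s
  else s

-- one `while`-body pass: changed := False, then relax every cell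
def bfPass (board : List String) (LX LY : Int) (INF : Nat) (scan : List (Int × Int))
    (g : List (List Nat)) : List (List Nat) × Bool :=
  scan.foldl (fun s p => bfRelax board LX LY INF p s) (g, false)

theorem pvBfInnerSum (board : List String) (LX LY : Int) (INF : Nat) (p : Int × Int) :
    ∀ (ms : List (Int × Int)) (s : List (List Nat) × Bool),
      pvGridSum (ms.foldl (fun s2 m =>
        let t := slideB board LX LY m.1 m.2 (slideFuelB LX LY p.1 p.2) p.1 p.2
        if dgetB s2.1 p.1 p.2 + 1 < dgetB s2.1 t.1 t.2 then
          (dsetB s2.1 t.1 t.2 (dgetB s2.1 p.1 p.2 + 1), true)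
        else s2) s).1 ≤ pvGridSum s.1 ∧
      ((ms.foldl (fun s2 m =>
        let t := slideB board LX LY m.1 m.2 (slideFuelB LX LY p.1 p.2) p.1 p.2
        if dgetB s2.1 p.1 p.2 + 1 < dgetB s2.1 t.1 t.2 then
          (dsetB s2.1 t.1 t.2 (dgetB s2.1 p.1 p.2 + 1), true)
        else s2) s).2 = true → s.2 = true ∨ pvGridSum (ms.foldl (fun s2 m =>
        let t := slideB board LX LY m.1 m.2 (slideFuelB LX LY p.1 p.2) p.1 p.2
        if dgetB s2.1 p.1 p.2 + 1 < dgetB s2.1 t.1 t.2 then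
          (dsetB s2.1 t.1 t.2 (dgetB s2.1 p.1 p.2 + 1), true)
        else s2) s).1 < pvGridSum s.1) := by
  intro ms
  induction ms with
  | nil => intro s; exact ⟨le_refl _, fun h => Or.inl h⟩
  | cons m rest ih =>
    intro s
    simp only [List.foldl_cons]
    by_cases hg : dgetB s.1 p.1 p.2 + 1 <
        dgetB s.1 (slideB board LX LY m.1 m.2 (slideFuelB LX LY p.1 p.2) p.1 p.2).1
          (slideB board LX LY m.1 m.2 (slideFuelB LX LY p.1 p.2) p.1 p.2).2
    · rw [if_pos hg]
      have hne : pvGridGet 0 s.1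
          (slideB board LX LY m.1 m.2 (slideFuelB LX LY p.1 p.2) p.1 p.2).1.toNat
          (slideB board LX LY m.1 m.2 (slideFuelB LX LY p.1 p.2) p.1 p.2).2.toNat ≠ 0 := by
        show dgetB s.1 _ _ ≠ 0
        omega
      obtain ⟨hj, hi⟩ := pvGridGet_ne_default_inbounds hne
      have hsum := pvGridSum_set s.1
        (slideB board LX LY m.1 m.2 (slideFuelB LX LY p.1 p.2) p.1 p.2).1.toNat
        (slideB board LX LY m.1 m.2 (slideFuelB LX LY p.1 p.2) p.1 p.2).2.toNat
        (dgetB s.1 p.1 p.2 + 1) hj hi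
      have hlt : pvGridSum (dsetB s.1
          (slideB board LX LY m.1 m.2 (slideFuelB LX LY p.1 p.2) p.1 p.2).1
          (slideB board LX LY m.1 m.2 (slideFuelB LX LY p.1 p.2) p.1 p.2).2
          (dgetB s.1 p.1 p.2 + 1)) < pvGridSum s.1 := by
        have hold : dgetB s.1 (slideB board LX LY m.1 m.2 (slideFuelB LX LY p.1 p.2) p.1 p.2).1
            (slideB board LX LY m.1 m.2 (slideFuelB LX LY p.1 p.2) p.1 p.2).2
            = pvGridGet 0 s.1
              (slideB board LX LY m.1 m.2 (slideFuelB LX LY p.1 p.2) p.1 p.2).1.toNat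
              (slideB board LX LY m.1 m.2 (slideFuelB LX LY p.1 p.2) p.1 p.2).2.toNat := rfl
        unfold dsetB
        omega
      obtain ⟨h1, h2⟩ := ih (dsetB s.1
          (slideB board LX LY m.1 m.2 (slideFuelB LX LY p.1 p.2) p.1 p.2).1
          (slideB board LX LY m.1 m.2 (slideFuelB LX LY p.1 p.2) p.1 p.2).2
          (dgetB s.1 p.1 p.2 + 1), true)
      refine ⟨le_trans h1 (le_of_lt hlt), fun _ => Or.inr (lt_of_le_of_lt h1 hlt)⟩
    · rw [if_neg hg]
      exact ih s

theorem pvBfRelaxSum (board : List String) (LX LY : Int) (INF : Nat) (p : Int × Int)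
    (s : List (List Nat) × Bool) :
    pvGridSum (bfRelax board LX LY INF p s).1 ≤ pvGridSum s.1 ∧
    ((bfRelax board LX LY INF p s).2 = true →
      s.2 = true ∨ pvGridSum (bfRelax board LX LY INF p s).1 < pvGridSum s.1) := by
  unfold bfRelax
  split
  · exact pvBfInnerSum board LX LY INF p movesB s
  · exact ⟨le_refl _, fun h => Or.inl h⟩

theorem pvBfPassSum (board : List String) (LX LY : Int) (INF : Nat) :
    ∀ (scan : List (Int × Int)) (s : List (List Nat) × Bool),
      pvGridSum (scan.foldl (fun s p => bfRelax board LX LY INF p s) s).1 ≤ pvGridSum s.1 ∧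
      ((scan.foldl (fun s p => bfRelax board LX LY INF p s) s).2 = true →
        s.2 = true ∨
          pvGridSum (scan.foldl (fun s p => bfRelax board LX LY INF p s) s).1 < pvGridSum s.1) := by
  intro scan
  induction scan with
  | nil => intro s; exact ⟨le_refl _, fun h => Or.inl h⟩
  | cons p rest ih =>
    intro s
    simp only [List.foldl_cons]
    obtain ⟨r1, r2⟩ := pvBfRelaxSum board LX LY INF p s
    obtain ⟨i1, i2⟩ := ih (bfRelax board LX LY INF p s)
    refine ⟨le_trans i1 r1, fun h => ?_⟩
    rcases i2 h with h2 | h2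
    · rcases r2 h2 with h3 | h3
      · exact Or.inl h3
      · exact Or.inr (lt_of_le_of_lt i1 h3)
    · exact Or.inr (lt_of_lt_of_le h2 r1)

theorem pvBfPassDec (board : List String) (LX LY : Int) (INF : Nat) (scan : List (Int × Int))
    (g : List (List Nat)) (h : (bfPass board LX LY INF scan g).2 = true) :
    pvGridSum (bfPass board LX LY INF scan g).1 < pvGridSum g := by
  obtain ⟨_, h2⟩ := pvBfPassSum board LX LY INF scan (g, false)
  rcases h2 h with h3 | h3
  · simp at h3
  · exact h3

-- the `while changed:` loop (changed starts True, so the pass always runs once)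
def bfLoop (board : List String) (LX LY : Int) (INF : Nat) (scan : List (Int × Int))
    (g : List (List Nat)) : List (List Nat) :=
  if h : (bfPass board LX LY INF scan g).2 = true then
    bfLoop board LX LY INF scan (bfPass board LX LY INF scan g).1
  else (bfPass board LX LY INF scan g).1
termination_by pvGridSum g
decreasing_by exact pvBfPassDec board LX LY INF scan g h

-- the final `best` scan over all cells
def bfBest (board : List String) (scan : List (Int × Int)) (g : List (List Nat))
    (init : Nat) : Nat :=
  scan.foldl (fun best p =>
    if boardAtB board p.1 p.2 = 'G' ∧ dgetB g p.1 p.2 < best then dgetB g p.1 p.2 else best) init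

def solution_alt (board : List String) : Int :=
  let LX : Int := PySem.Str.len (board.getD 0 "")
  let LY : Int := (board.length : Int)
  match bfFind board with
  | none => -1   -- Source B's next(...) raises StopIteration here; excluded by Pre_solution
  | some ryx =>
    let INF : Nat := LX.toNat * LY.toNat + 1
    let scan := bfScan LX.toNat LY.toNat
    let g0 := dsetB (List.replicate LY.toNat (List.replicate LX.toNat INF)) ryx.2 ryx.1 0
    let gF := bfLoop board LX LY INF scan g0
    let best := bfBest board scan gF INF
    if best < INF then (best : Int) else -1

-- ===== PRECONDITION & SPEC =====
-- Pre_ excludes inputs where Python A raises (IndexError/TypeError) or may raise: the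
-- empty board, boards without 'R', boards whose first 'R' sits at a column ≥ len(board[0])
-- (visited[y][x] is an IndexError), and boards with a row shorter than row 0, on which
-- A raises IndexError or returns depending on the search path (not closed-form; B always
-- raises IndexError on those when it scans board[y][x] for the final minimum).
def Pre_solution (board : List String) : Prop :=
  board ≠ [] ∧ (∀ s ∈ board, (board.getD 0 "").toList.length ≤ s.toList.length) ∧
    (∃ s ∈ board, 'R' ∈ s.toList) ∧
    (∀ s ∈ board, board.find? (fun r => decide ('R' ∈ r.toList)) = some s →
      s.toList.idxOf 'R' < (board.getD 0 "").toList.length)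
instance (board : List String) : Decidable (Pre_solution board) := by
  unfold Pre_solution; infer_instance

def pvWitness_solution : List String := ["RG"]

def Spec_solution (board : List String) (out : Int) : Prop := out = solution_alt board
instance (board : List String) (out : Int) : Decidable (Spec_solution board out) := by
  unfold Spec_solution; infer_instance

-- ===== CLAIM (what is proved, stated in full; the proofs are below) =====
def Claim_equal_solution : Prop :=
  ∀ (board : List String), Dom_solution board → Pre_solution board →
    Spec_solution board (solution board)

-- ===== LEMMAS AND PROOFS =====
-- Proof-side device: a level-synchronous restatement of A's BFS (frontier list, boolean
-- visited grid, step counter).  A's deque loop is first proved equal to it (pvMain), and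
-- it is then proved equal to B's fixpoint distances via the reachability relation ReachL.
def bgetB (v : List (List Bool)) (x y : Int) : Bool := pvGridGet true v x.toNat y.toNat
def bsetB (v : List (List Bool)) (x y : Int) (k : Bool) : List (List Bool) :=
  pvGridSet v x.toNat y.toNat k
def falsesB (v : List (List Bool)) : Nat := pvGridCount (· == false) v

def expandL (board : List String) (LX LY x y : Int) (s : List (List Bool) × List (Int × Int)) :
    List (List Bool) × List (Int × Int) :=
  movesB.foldl (fun s m =>
    let t := slideB board LX LY m.1 m.2 (slideFuelB LX LY x y) x y
    if bgetB s.1 t.1 t.2 = false then (bsetB s.1 t.1 t.2 true, s.2 ++ [t]) else s) s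

def levelL (board : List String) (LX LY : Int) (front : List (Int × Int))
    (vb : List (List Bool)) : List (List Bool) × List (Int × Int) :=
  front.foldl (fun s c => expandL board LX LY c.1 c.2 s) (vb, [])

theorem pvFoldMeasureL (board : List String) (LX LY x y : Int) :
    ∀ (ms : List (Int × Int)) (s : List (List Bool) × List (Int × Int)),
      falsesB (ms.foldl (fun s m =>
        let t := slideB board LX LY m.1 m.2 (slideFuelB LX LY x y) x y
        if bgetB s.1 t.1 t.2 = false then (bsetB s.1 t.1 t.2 true, s.2 ++ [t]) else s) s).1
      + (ms.foldl (fun s m =>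
        let t := slideB board LX LY m.1 m.2 (slideFuelB LX LY x y) x y
        if bgetB s.1 t.1 t.2 = false then (bsetB s.1 t.1 t.2 true, s.2 ++ [t]) else s) s).2.length
      = falsesB s.1 + s.2.length := by
  intro ms
  induction ms with
  | nil => intro s; simp
  | cons m rest ih =>
    intro s
    simp only [List.foldl_cons]
    rw [ih _]
    try dsimp only
    by_cases hg : bgetB s.1 (slideB board LX LY m.1 m.2 (slideFuelB LX LY x y) x y).1
        (slideB board LX LY m.1 m.2 (slideFuelB LX LY x y) x y).2 = false
    · have hg' : pvGridGet true s.1 (slideB board LX LY m.1 m.2 (slideFuelB LX LY x y) x y).1.toNat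
          (slideB board LX LY m.1 m.2 (slideFuelB LX LY x y) x y).2.toNat = false := hg
      have hz := pvGridCount_set (d := true) (p := (· == false)) s.1 _ _ true
        (by rw [hg']; simp) (by rw [hg']; rfl) (by simp)
      rw [if_pos hg]
      simp only [falsesB, bsetB, List.length_append, List.length_cons, List.length_nil] at *
      omega
    · simp [hg]

theorem expandL_measure (board : List String) (LX LY x y : Int)
    (s : List (List Bool) × List (Int × Int)) :
    falsesB (expandL board LX LY x y s).1 + (expandL board LX LY x y s).2.length
      = falsesB s.1 + s.2.length := by
  exact pvFoldMeasureL board LX LY x y movesB s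

theorem levelL_measure (board : List String) (LX LY : Int) (front : List (Int × Int))
    (vb : List (List Bool)) :
    falsesB (levelL board LX LY front vb).1 + (levelL board LX LY front vb).2.length
      = falsesB vb := by
  unfold levelL
  suffices h : ∀ (fr : List (Int × Int)) (s : List (List Bool) × List (Int × Int)),
      falsesB (fr.foldl (fun s c => expandL board LX LY c.1 c.2 s) s).1
      + (fr.foldl (fun s c => expandL board LX LY c.1 c.2 s) s).2.length
      = falsesB s.1 + s.2.length by
    simpa using h front (vb, [])
  intro fr
  induction fr with
  | nil => intro s; simp
  | cons c rest ih =>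
    intro s
    simp only [List.foldl_cons]
    rw [ih _, expandL_measure board LX LY c.1 c.2 s]

def loopL (board : List String) (LX LY : Int) : List (Int × Int) → List (List Bool) → Int → Int
  | [], _, _ => -1
  | c :: fr, vb, steps =>
    if (c :: fr).any (fun q => boardAtB board q.1 q.2 == 'G') then steps
    else loopL board LX LY (levelL board LX LY (c :: fr) vb).2
           (levelL board LX LY (c :: fr) vb).1 (steps + 1)
termination_by front vb => falsesB vb + front.length
decreasing_by
  have := levelL_measure board LX LY (c :: fr) vb
  simp only [List.length_cons] at *
  omega

theorem boardAtB_eq_boardAtA : boardAtB = boardAtA := rfl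

theorem movesB_eq_movesA : movesB = movesA := rfl

theorem slideFuelB_eq_slideFuelA : slideFuelB = slideFuelA := rfl

theorem slideB_eq_slideA (board : List String) (LX LY dx dy : Int) :
    ∀ (fuel : Nat) (nx ny : Int),
      slideB board LX LY dx dy fuel nx ny = slideA board LX LY dx dy fuel nx ny := by
  intro fuel
  induction fuel with
  | zero => intro nx ny; rfl
  | succ n ih =>
    intro nx ny
    simp only [slideA, slideB, boardAtB_eq_boardAtA]
    split
    · exact ih _ _
    · rfl

theorem pvGridGet_set_self {α : Type} {d : α} {v : List (List α)} {i j : Nat} (k : α)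
    (h : pvGridGet d v i j ≠ d) : pvGridGet d (pvGridSet v i j k) i j = k := by
  obtain ⟨hj, hi⟩ := pvGridGet_ne_default_inbounds h
  have hi' : i < v[j].length := by rwa [List.getD_eq_getElem _ _ hj] at hi
  unfold pvGridGet pvGridSet
  simp [List.getD, hj, hi']

theorem pvGridGet_set_ne {α : Type} (d : α) (v : List (List α)) (i j i' j' : Nat) (k : α)
    (h : ¬(i' = i ∧ j' = j)) : pvGridGet d (pvGridSet v i j k) i' j' = pvGridGet d v i' j' := by
  unfold pvGridGet pvGridSet
  by_cases hj : j = j'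
  · subst hj
    have hi : i ≠ i' := fun he => h ⟨he.symm, rfl⟩
    by_cases hjl : j < v.length
    · simp [List.getD, hjl, hi]
    · rw [List.set_eq_of_length_le (by omega)]
  · simp [List.getD, hj]

theorem vgetA_vsetA_preserve (v : List (List Nat)) (x y a b : Int) (k : Nat)
    (h0 : vgetA v x y = 0) (hnz : vgetA v a b ≠ 0) :
    vgetA (vsetA v x y k) a b = vgetA v a b := by
  by_cases he : a.toNat = x.toNat ∧ b.toNat = y.toNat
  · exact absurd (show vgetA v a b = 0 by unfold vgetA at h0 ⊢; rw [he.1, he.2]; exact h0) hnz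
  · exact pvGridGet_set_ne _ _ _ _ _ _ _ he

def InvVB (v : List (List Nat)) (vb : List (List Bool)) : Prop :=
  ∀ i j : Nat, pvGridGet true vb i j = true ↔ pvGridGet 1 v i j ≠ 0

theorem InvVB_set (v : List (List Nat)) (vb : List (List Bool)) (x y : Int) (k : Nat)
    (hk : k ≠ 0) (h0 : vgetA v x y = 0) (hb : bgetB vb x y = false) (hInv : InvVB v vb) :
    InvVB (vsetA v x y k) (bsetB vb x y true) := by
  intro i j
  by_cases he : i = x.toNat ∧ j = y.toNat
  · obtain ⟨h1, h2⟩ := he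
    subst h1; subst h2
    rw [show vsetA v x y k = pvGridSet v x.toNat y.toNat k from rfl,
        show bsetB vb x y true = pvGridSet vb x.toNat y.toNat true from rfl,
        pvGridGet_set_self k (show pvGridGet 1 v x.toNat y.toNat ≠ 1 by
          rw [show pvGridGet 1 v x.toNat y.toNat = vgetA v x y from rfl, h0]; omega),
        pvGridGet_set_self true (show pvGridGet true vb x.toNat y.toNat ≠ true by
          rw [show pvGridGet true vb x.toNat y.toNat = bgetB vb x y from rfl, hb]; simp)]
    simp [hk]
  · rw [show vsetA v x y k = pvGridSet v x.toNat y.toNat k from rfl,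
        show bsetB vb x y true = pvGridSet vb x.toNat y.toNat true from rfl,
        pvGridGet_set_ne _ _ _ _ _ _ _ he, pvGridGet_set_ne _ _ _ _ _ _ _ he]
    exact hInv i j

theorem pvExpandPair (board : List String) (LX LY x y : Int) (d : Nat) :
    ∀ (ms : List (Int × Int)) (v : List (List Nat)) (vb : List (List Bool))
      (accA accB : List (Int × Int)),
      InvVB v vb → vgetA v x y = d + 1 →
      ∃ v' vb' new,
        (ms.foldl (fun s m =>
          let t := slideA board LX LY m.1 m.2 (slideFuelA LX LY x y) x y
          if vgetA s.1 t.1 t.2 = 0 then (vsetA s.1 t.1 t.2 (vgetA s.1 x y + 1), s.2 ++ [t]) else s)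
          (v, accA)) = (v', accA ++ new) ∧
        (ms.foldl (fun s m =>
          let t := slideB board LX LY m.1 m.2 (slideFuelB LX LY x y) x y
          if bgetB s.1 t.1 t.2 = false then (bsetB s.1 t.1 t.2 true, s.2 ++ [t]) else s)
          (vb, accB)) = (vb', accB ++ new) ∧
        InvVB v' vb' ∧
        (∀ a b : Int, vgetA v a b ≠ 0 → vgetA v' a b = vgetA v a b) ∧
        (∀ c ∈ new, vgetA v' c.1 c.2 = d + 2) ∧
        zerosA v' + new.length = zerosA v := by
  intro ms
  induction ms with
  | nil =>
    intro v vb accA accB hInv _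
    exact ⟨v, vb, [], by simp, by simp, hInv, fun _ _ _ => rfl, by simp, by simp⟩
  | cons m rest ih =>
    intro v vb accA accB hInv hxy
    simp only [List.foldl_cons]
    try dsimp only
    rw [show slideB board LX LY m.1 m.2 (slideFuelB LX LY x y) x y
        = slideA board LX LY m.1 m.2 (slideFuelA LX LY x y) x y by
      rw [slideFuelB_eq_slideFuelA, slideB_eq_slideA]]
    by_cases hg : vgetA v (slideA board LX LY m.1 m.2 (slideFuelA LX LY x y) x y).1
        (slideA board LX LY m.1 m.2 (slideFuelA LX LY x y) x y).2 = 0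
    · have hgB : bgetB vb (slideA board LX LY m.1 m.2 (slideFuelA LX LY x y) x y).1
          (slideA board LX LY m.1 m.2 (slideFuelA LX LY x y) x y).2 = false := by
        have hiff := hInv (slideA board LX LY m.1 m.2 (slideFuelA LX LY x y) x y).1.toNat
          (slideA board LX LY m.1 m.2 (slideFuelA LX LY x y) x y).2.toNat
        exact Bool.eq_false_iff.mpr (fun htr => (hiff.mp htr) hg)
      rw [if_pos hg, if_pos hgB, hxy]
      have hInv1 := InvVB_set v vb _ _ (d + 1 + 1) (by omega) hg hgB hInv
      have hxy1 : vgetA (vsetA v (slideA board LX LY m.1 m.2 (slideFuelA LX LY x y) x y).1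
          (slideA board LX LY m.1 m.2 (slideFuelA LX LY x y) x y).2 (d + 1 + 1)) x y = d + 1 := by
        rw [vgetA_vsetA_preserve v _ _ x y _ hg (by rw [hxy]; omega)]
        exact hxy
      obtain ⟨v', vb', new, hA, hB, hInv', hpres, hnew, hz⟩ :=
        ih _ _ (accA ++ [slideA board LX LY m.1 m.2 (slideFuelA LX LY x y) x y])
          (accB ++ [slideA board LX LY m.1 m.2 (slideFuelA LX LY x y) x y]) hInv1 hxy1
      refine ⟨v', vb', slideA board LX LY m.1 m.2 (slideFuelA LX LY x y) x y :: new,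
        by rw [hA]; simp, by rw [hB]; simp, hInv', ?_, ?_, ?_⟩
      · intro a b h
        have h1 := vgetA_vsetA_preserve v _ _ a b (d + 1 + 1) hg h
        rw [hpres a b (by rw [h1]; exact h), h1]
      · intro c hc
        rcases List.mem_cons.mp hc with hc | hc
        · subst hc
          have hmark : vgetA (vsetA v (slideA board LX LY m.1 m.2 (slideFuelA LX LY x y) x y).1
              (slideA board LX LY m.1 m.2 (slideFuelA LX LY x y) x y).2 (d + 1 + 1))
              (slideA board LX LY m.1 m.2 (slideFuelA LX LY x y) x y).1
              (slideA board LX LY m.1 m.2 (slideFuelA LX LY x y) x y).2 = d + 1 + 1 :=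
            pvGridGet_set_self _ (by
              rw [show pvGridGet 1 v (slideA board LX LY m.1 m.2 (slideFuelA LX LY x y) x y).1.toNat
                (slideA board LX LY m.1 m.2 (slideFuelA LX LY x y) x y).2.toNat
                = vgetA v (slideA board LX LY m.1 m.2 (slideFuelA LX LY x y) x y).1
                  (slideA board LX LY m.1 m.2 (slideFuelA LX LY x y) x y).2 from rfl, hg]; omega)
          rw [hpres _ _ (by rw [hmark]; omega), hmark]
        · exact hnew c hc
      · have hgrid : pvGridGet 1 v (slideA board LX LY m.1 m.2 (slideFuelA LX LY x y) x y).1.toNat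
            (slideA board LX LY m.1 m.2 (slideFuelA LX LY x y) x y).2.toNat = 0 := hg
        have hcnt := pvGridCount_set (d := 1) (p := (· == 0)) v
          (slideA board LX LY m.1 m.2 (slideFuelA LX LY x y) x y).1.toNat
          (slideA board LX LY m.1 m.2 (slideFuelA LX LY x y) x y).2.toNat (d + 1 + 1)
          (by rw [hgrid]; omega) (by rw [hgrid]; rfl) (by simp)
        simp only [List.length_cons]
        rw [show zerosA (vsetA v (slideA board LX LY m.1 m.2 (slideFuelA LX LY x y) x y).1
          (slideA board LX LY m.1 m.2 (slideFuelA LX LY x y) x y).2 (d + 1 + 1))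
          = pvGridCount (· == 0) (pvGridSet v
            (slideA board LX LY m.1 m.2 (slideFuelA LX LY x y) x y).1.toNat
            (slideA board LX LY m.1 m.2 (slideFuelA LX LY x y) x y).2.toNat (d + 1 + 1)) from rfl] at hz
        unfold zerosA at hz ⊢
        omega
    · have hgB : bgetB vb (slideA board LX LY m.1 m.2 (slideFuelA LX LY x y) x y).1
          (slideA board LX LY m.1 m.2 (slideFuelA LX LY x y) x y).2 = true :=
        (hInv _ _).mpr hg
      rw [if_neg hg, if_neg (by rw [hgB]; simp)]
      exact ih v vb accA accB hInv hxy

theorem pvLevelPair (board : List String) (LX LY : Int) (d : Nat) :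
    ∀ (cur nxt : List (Int × Int)) (v : List (List Nat)) (vb : List (List Bool))
      (acc : List (Int × Int)),
      InvVB v vb →
      (∀ c ∈ cur, vgetA v c.1 c.2 = d + 1) →
      (∀ c ∈ nxt, vgetA v c.1 c.2 = d + 2) →
      (∀ c ∈ cur, boardAtA board c.1 c.2 ≠ 'G') →
      ∃ v' vb' new,
        loopA board LX LY (cur ++ nxt) v = loopA board LX LY (nxt ++ new) v' ∧
        cur.foldl (fun s c => expandL board LX LY c.1 c.2 s) (vb, acc) = (vb', acc ++ new) ∧
        InvVB v' vb' ∧ (∀ c ∈ nxt ++ new, vgetA v' c.1 c.2 = d + 2) ∧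
        zerosA v' + new.length = zerosA v := by
  intro cur
  induction cur with
  | nil =>
    intro nxt v vb acc hInv _ hnxt _
    exact ⟨v, vb, [], by simp, by simp, hInv, by simpa using hnxt, by simp⟩
  | cons c cu ih =>
    intro nxt v vb acc hInv hcur hnxt hnoG
    obtain ⟨v₁, vb₁, new₁, hA, hB, hInv₁, hpres₁, hnew₁, hz₁⟩ :=
      pvExpandPair board LX LY c.1 c.2 d movesA v vb [] acc hInv (hcur c (by simp))
    have hEA : expandA board LX LY c.1 c.2 v = (v₁, new₁) := by
      unfold expandA; simpa using hA
    have hEB : expandL board LX LY c.1 c.2 (vb, acc) = (vb₁, acc ++ new₁) := by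
      unfold expandL; rw [movesB_eq_movesA]; exact hB
    have hstep : loopA board LX LY ((c :: cu) ++ nxt) v
        = loopA board LX LY ((cu ++ nxt) ++ new₁) v₁ := by
      show loopA board LX LY (c :: (cu ++ nxt)) v = _
      rw [loopA, if_neg (hnoG c (by simp)), hEA]
    have hcur' : ∀ q ∈ cu, vgetA v₁ q.1 q.2 = d + 1 := by
      intro q hq
      rw [hpres₁ q.1 q.2 (by rw [hcur q (by simp [hq])]; omega)]
      exact hcur q (by simp [hq])
    have hnxt' : ∀ q ∈ nxt ++ new₁, vgetA v₁ q.1 q.2 = d + 2 := by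
      intro q hq
      rcases List.mem_append.mp hq with h | h
      · rw [hpres₁ q.1 q.2 (by rw [hnxt q h]; omega)]; exact hnxt q h
      · exact hnew₁ q h
    obtain ⟨v', vb', new', hA', hB', hInv', hnew', hz'⟩ :=
      ih (nxt ++ new₁) v₁ vb₁ (acc ++ new₁) hInv₁ hcur' hnxt'
        (fun q hq => hnoG q (by simp [hq]))
    refine ⟨v', vb', new₁ ++ new', ?_, ?_, hInv', ?_, ?_⟩
    · rw [hstep, List.append_assoc, hA', List.append_assoc]
    · simp only [List.foldl_cons]
      rw [hEB, hB', List.append_assoc]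
    · intro q hq
      exact hnew' q (by rwa [← List.append_assoc] at hq)
    · simp only [List.length_append] at hz' ⊢
      omega

theorem pvFoldA_preserve (board : List String) (LX LY x y : Int) :
    ∀ (ms : List (Int × Int)) (v : List (List Nat)) (acc : List (Int × Int)) (a b : Int),
      vgetA v a b ≠ 0 →
      vgetA ((ms.foldl (fun s m =>
        let t := slideA board LX LY m.1 m.2 (slideFuelA LX LY x y) x y
        if vgetA s.1 t.1 t.2 = 0 then (vsetA s.1 t.1 t.2 (vgetA s.1 x y + 1), s.2 ++ [t]) else s)
        (v, acc)).1) a b = vgetA v a b := by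
  intro ms
  induction ms with
  | nil => intro v acc a b _; rfl
  | cons m rest ih =>
    intro v acc a b h
    simp only [List.foldl_cons]
    try dsimp only
    by_cases hg : vgetA v (slideA board LX LY m.1 m.2 (slideFuelA LX LY x y) x y).1
        (slideA board LX LY m.1 m.2 (slideFuelA LX LY x y) x y).2 = 0
    · rw [if_pos hg]
      have h1 := vgetA_vsetA_preserve v _ _ a b (vgetA v x y + 1) hg h
      rw [ih _ _ a b (by rw [h1]; exact h), h1]
    · rw [if_neg hg]
      exact ih v acc a b h

theorem expandA_preserve (board : List String) (LX LY x y : Int) (v : List (List Nat))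
    (a b : Int) (h : vgetA v a b ≠ 0) :
    vgetA (expandA board LX LY x y v).1 a b = vgetA v a b :=
  pvFoldA_preserve board LX LY x y movesA v [] a b h

theorem pvLoopA_G (board : List String) (LX LY : Int) (d : Nat) :
    ∀ (cur nxt : List (Int × Int)) (v : List (List Nat)),
      (∀ c ∈ cur, vgetA v c.1 c.2 = d + 1) →
      (∃ c ∈ cur, boardAtA board c.1 c.2 = 'G') →
      loopA board LX LY (cur ++ nxt) v = (d : Int) := by
  intro cur
  induction cur with
  | nil => intro nxt v _ hG; simp at hG
  | cons c cu ih =>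
    intro nxt v hcur hG
    show loopA board LX LY (c :: (cu ++ nxt)) v = _
    rw [loopA]
    by_cases hc : boardAtA board c.1 c.2 = 'G'
    · rw [if_pos hc, hcur c (by simp)]
      push_cast
      ring
    · rw [if_neg hc]
      have hGcu : ∃ q ∈ cu, boardAtA board q.1 q.2 = 'G' := by
        rcases hG with ⟨q, hq, hqG⟩
        rcases List.mem_cons.mp hq with h | h
        · exact absurd (h ▸ hqG) hc
        · exact ⟨q, h, hqG⟩
      have hcu : ∀ q ∈ cu, vgetA (expandA board LX LY c.1 c.2 v).1 q.1 q.2 = d + 1 := by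
        intro q hq
        rw [expandA_preserve board LX LY c.1 c.2 v q.1 q.2
          (by rw [hcur q (by simp [hq])]; omega)]
        exact hcur q (by simp [hq])
      rw [List.append_assoc]
      exact ih (nxt ++ (expandA board LX LY c.1 c.2 v).2) _ hcu hGcu

theorem pvMain (board : List String) (LX LY : Int) :
    ∀ (n : Nat) (cur : List (Int × Int)) (v : List (List Nat)) (vb : List (List Bool)) (d : Nat),
      zerosA v + cur.length ≤ n → InvVB v vb →
      (∀ c ∈ cur, vgetA v c.1 c.2 = d + 1) →
      loopA board LX LY cur v = loopL board LX LY cur vb (d : Int) := by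
  intro n
  induction n with
  | zero =>
    intro cur v vb d hn _ _
    have hcur : cur = [] := List.eq_nil_of_length_eq_zero (by omega)
    subst hcur
    simp [loopA, loopL]
  | succ n ih =>
    intro cur v vb d hn hInv hcur
    match cur with
    | [] => simp [loopA, loopL]
    | c :: fr =>
      rw [loopL]
      by_cases hG : (c :: fr).any (fun q => boardAtB board q.1 q.2 == 'G')
      · rw [if_pos hG]
        have hex : ∃ q ∈ c :: fr, boardAtA board q.1 q.2 = 'G' := by
          simpa [boardAtB_eq_boardAtA, List.any_eq_true, beq_iff_eq] using hG
        have := pvLoopA_G board LX LY d (c :: fr) [] v hcur hex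
        simpa using this
      · rw [if_neg hG]
        have hnoG : ∀ q ∈ c :: fr, boardAtA board q.1 q.2 ≠ 'G' := by
          intro q hq
          have := (List.any_eq_false.mp (Bool.eq_false_iff.mpr hG)) q hq
          simpa [boardAtB_eq_boardAtA, beq_iff_eq] using this
        obtain ⟨v', vb', new, hA, hB, hInv', hnew, hz⟩ :=
          pvLevelPair board LX LY d (c :: fr) [] v vb [] hInv hcur (by simp) hnoG
        have hLB : levelL board LX LY (c :: fr) vb = (vb', new) := by
          unfold levelL; simpa using hB
        rw [hLB]
        simp only [List.append_nil] at hA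
        simp only [List.nil_append] at hA hnew
        rw [hA]
        rw [show (d : Int) + 1 = ((d + 1 : Nat) : Int) by push_cast; ring]
        refine ih new v' vb' (d + 1) ?_ hInv' hnew
        simp only [List.length_cons] at hn
        omega

theorem pvGridGet_replicate {α : Type} (d z : α) (m n i j : Nat) :
    pvGridGet d (List.replicate m (List.replicate n z)) i j = if j < m ∧ i < n then z else d := by
  unfold pvGridGet
  by_cases hj : j < m
  · rw [show (List.replicate m (List.replicate n z)).getD j [] = List.replicate n z by
      rw [List.getD_eq_getElem _ _ (by simpa using hj)]; simp]
    by_cases hi : i < n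
    · rw [List.getD_eq_getElem _ _ (by simpa using hi), List.getElem_replicate,
        if_pos ⟨hj, hi⟩]
    · rw [List.getD_eq_default _ _ (by simp; omega), if_neg (fun hc => hi hc.2)]
  · rw [show (List.replicate m (List.replicate n z)).getD j [] = [] by
      apply List.getD_eq_default; simp; omega]
    rw [if_neg (fun hc => hj hc.1)]
    simp [List.getD]

theorem pvGridSet_oob {α : Type} (v : List (List α)) (i j : Nat) (k : α)
    (h : ¬(j < v.length ∧ i < (v.getD j []).length)) : pvGridSet v i j k = v := by
  unfold pvGridSet
  by_cases hj : j < v.length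
  · have hrow : v.getD j [] = v[j] := List.getD_eq_getElem _ _ hj
    have hi : v[j].length ≤ i := by
      rcases Nat.lt_or_ge i v[j].length with h' | h'
      · exact absurd ⟨hj, by rwa [hrow]⟩ h
      · exact h'
    rw [hrow, List.set_eq_of_length_le hi, List.set_getElem_self hj]
  · rw [List.set_eq_of_length_le (Nat.le_of_not_lt hj)]

theorem pvInitInv (LXn LYn : Nat) (rx ry : Int) :
    InvVB (vsetA (List.replicate LYn (List.replicate LXn 0)) rx ry 1)
          (bsetB (List.replicate LYn (List.replicate LXn false)) rx ry true) := by
  intro i j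
  rw [show vsetA (List.replicate LYn (List.replicate LXn 0)) rx ry 1
      = pvGridSet (List.replicate LYn (List.replicate LXn 0)) rx.toNat ry.toNat 1 from rfl,
    show bsetB (List.replicate LYn (List.replicate LXn false)) rx ry true
      = pvGridSet (List.replicate LYn (List.replicate LXn false)) rx.toNat ry.toNat true from rfl]
  by_cases hin : ry.toNat < LYn ∧ rx.toNat < LXn
  · by_cases he : i = rx.toNat ∧ j = ry.toNat
    · obtain ⟨h1, h2⟩ := he
      subst h1; subst h2
      rw [pvGridGet_set_self 1 (by rw [pvGridGet_replicate]; simp [hin.1, hin.2]),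
          pvGridGet_set_self true (by rw [pvGridGet_replicate]; simp [hin.1, hin.2])]
      simp
    · rw [pvGridGet_set_ne _ _ _ _ _ _ _ he, pvGridGet_set_ne _ _ _ _ _ _ _ he,
          pvGridGet_replicate, pvGridGet_replicate]
      split_ifs <;> simp
  · have hlen : ¬(ry.toNat < (List.replicate LYn (List.replicate LXn (0:Nat))).length ∧
        rx.toNat < ((List.replicate LYn (List.replicate LXn (0:Nat))).getD ry.toNat []).length) := by
      intro hc
      apply hin
      refine ⟨by simpa using hc.1, ?_⟩
      have := hc.2
      rwa [List.getD_eq_getElem _ _ (by simpa using hc.1), List.getElem_replicate,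
        List.length_replicate] at this
    have hlenB : ¬(ry.toNat < (List.replicate LYn (List.replicate LXn false)).length ∧
        rx.toNat < ((List.replicate LYn (List.replicate LXn false)).getD ry.toNat []).length) := by
      intro hc
      apply hin
      refine ⟨by simpa using hc.1, ?_⟩
      have := hc.2
      rwa [List.getD_eq_getElem _ _ (by simpa using hc.1), List.getElem_replicate,
        List.length_replicate] at this
    rw [pvGridSet_oob _ _ _ _ hlen, pvGridSet_oob _ _ _ _ hlenB,
        pvGridGet_replicate, pvGridGet_replicate]
    split_ifs <;> simp

theorem pvInitLabel (LXn LYn : Nat) (rx ry : Int) :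
    vgetA (vsetA (List.replicate LYn (List.replicate LXn 0)) rx ry 1) rx ry = 1 := by
  rw [show vgetA (vsetA (List.replicate LYn (List.replicate LXn 0)) rx ry 1) rx ry
      = pvGridGet 1 (pvGridSet (List.replicate LYn (List.replicate LXn 0)) rx.toNat ry.toNat 1)
        rx.toNat ry.toNat from rfl]
  by_cases hin : ry.toNat < LYn ∧ rx.toNat < LXn
  · rw [pvGridGet_set_self 1 (by rw [pvGridGet_replicate]; simp [hin.1, hin.2])]
  · have hlen : ¬(ry.toNat < (List.replicate LYn (List.replicate LXn (0:Nat))).length ∧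
        rx.toNat < ((List.replicate LYn (List.replicate LXn (0:Nat))).getD ry.toNat []).length) := by
      intro hc
      apply hin
      refine ⟨by simpa using hc.1, ?_⟩
      have := hc.2
      rwa [List.getD_eq_getElem _ _ (by simpa using hc.1), List.getElem_replicate,
        List.length_replicate] at this
    rw [pvGridSet_oob _ _ _ _ hlen, pvGridGet_replicate]
    rw [if_neg hin]

-- Reachability in the slide graph (proof-side only)
def inbP (LX LY : Int) (c : Int × Int) : Prop := 0 ≤ c.1 ∧ c.1 < LX ∧ 0 ≤ c.2 ∧ c.2 < LY

def succL (board : List String) (LX LY : Int) (p : Int × Int) : List (Int × Int) :=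
  movesB.map (fun m => slideB board LX LY m.1 m.2 (slideFuelB LX LY p.1 p.2) p.1 p.2)

def ReachL (board : List String) (LX LY : Int) (start : Int × Int) : Nat → (Int × Int) → Prop
  | 0, c => c = start
  | k+1, c => ReachL board LX LY start k c ∨
      ∃ p, ReachL board LX LY start k p ∧ c ∈ succL board LX LY p

theorem reach_step (board : List String) (LX LY : Int) (start : Int × Int) (k : Nat)
    (p c : Int × Int) (hp : ReachL board LX LY start k p) (hc : c ∈ succL board LX LY p) :
    ReachL board LX LY start (k+1) c :=
  Or.inr ⟨p, hp, hc⟩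

theorem reach_mono (board : List String) (LX LY : Int) (start : Int × Int) {k k' : Nat}
    (h : k ≤ k') (c : Int × Int) (hr : ReachL board LX LY start k c) :
    ReachL board LX LY start k' c := by
  induction k', h using Nat.le_induction with
  | base => exact hr
  | succ m hm ih => exact Or.inl ih

theorem slide_inb (board : List String) (LX LY dx dy : Int) :
    ∀ (fuel : Nat) (nx ny : Int), 0 ≤ nx → nx < LX → 0 ≤ ny → ny < LY →
      inbP LX LY (slideB board LX LY dx dy fuel nx ny) := by
  intro fuel
  induction fuel with
  | zero => intro nx ny h1 h2 h3 h4; exact ⟨h1, h2, h3, h4⟩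
  | succ n ih =>
    intro nx ny h1 h2 h3 h4
    rw [slideB]
    split
    · next hc => exact ih _ _ hc.1 hc.2.1 hc.2.2.1 hc.2.2.2.1
    · exact ⟨h1, h2, h3, h4⟩

theorem succ_inb (board : List String) (LX LY : Int) (p c : Int × Int)
    (hp : inbP LX LY p) (hc : c ∈ succL board LX LY p) : inbP LX LY c := by
  obtain ⟨m, _, hm⟩ := List.mem_map.mp hc
  exact hm ▸ slide_inb board LX LY m.1 m.2 _ p.1 p.2 hp.1 hp.2.1 hp.2.2.1 hp.2.2.2

theorem reach_inb (board : List String) (LX LY : Int) (start : Int × Int)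
    (hst : inbP LX LY start) : ∀ (k : Nat) (c : Int × Int),
      ReachL board LX LY start k c → inbP LX LY c := by
  intro k
  induction k with
  | zero => intro c h; exact h ▸ hst
  | succ n ih =>
    intro c h
    rcases h with h | ⟨p, hp, hc⟩
    · exact ih c h
    · exact succ_inb board LX LY p c (ih p hp) hc

theorem reach_down (board : List String) (LX LY : Int) (start : Int × Int) (j : Nat)
    (hstab : ∀ c, ReachL board LX LY start (j+1) c → ReachL board LX LY start j c) :
    ∀ (m : Nat) (c : Int × Int), ReachL board LX LY start (j+m) c →
      ReachL board LX LY start j c := by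
  intro m
  induction m with
  | zero => intro c h; exact h
  | succ n ih =>
    intro c h
    rcases h with h | ⟨p, hp, hc⟩
    · exact ih c h
    · exact hstab c (reach_step board LX LY start j p c (ih p hp) hc)

theorem reach_collapse (board : List String) (LX LY : Int) (start : Int × Int) (j : Nat)
    (hstab : ∀ c, ReachL board LX LY start (j+1) c → ReachL board LX LY start j c)
    (m : Nat) (c : Int × Int) (h : ReachL board LX LY start m c) :
    ReachL board LX LY start j c := by
  rcases Nat.le_total m j with hm | hm
  · exact reach_mono board LX LY start hm c h
  · exact reach_down board LX LY start j hstab (m - j) c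
      (by rwa [Nat.add_sub_cancel' hm])

theorem coord_eq (c c' : Int × Int) (h1 : 0 ≤ c.1) (h2 : 0 ≤ c.2) (h3 : 0 ≤ c'.1)
    (h4 : 0 ≤ c'.2) (hx : c.1.toNat = c'.1.toNat) (hy : c.2.toNat = c'.2.toNat) : c = c' := by
  cases c; cases c'
  simp only [Prod.mk.injEq]
  constructor <;> omega

-- grid shape
def ShapeG {α : Type} (LXn LYn : Nat) (g : List (List α)) : Prop :=
  g.length = LYn ∧ ∀ r ∈ g, r.length = LXn

theorem shape_replicate {α : Type} (LXn LYn : Nat) (z : α) :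
    ShapeG LXn LYn (List.replicate LYn (List.replicate LXn z)) := by
  constructor
  · simp
  · intro r hr
    rw [List.eq_of_mem_replicate hr]
    simp

theorem shape_set {α : Type} (LXn LYn : Nat) (g : List (List α)) (i j : Nat) (k : α)
    (h : ShapeG LXn LYn g) : ShapeG LXn LYn (pvGridSet g i j k) := by
  obtain ⟨hl, hr⟩ := h
  by_cases hj : j < g.length
  · constructor
    · simp [pvGridSet, hl]
    · intro r hmem
      rcases List.mem_or_eq_of_mem_set hmem with h' | h'
      · exact hr r h'
      · subst h'
        rw [List.length_set, List.getD_eq_getElem _ _ hj]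
        exact hr _ (List.getElem_mem hj)
  · unfold pvGridSet
    rw [List.set_eq_of_length_le (by omega)]
    exact ⟨hl, hr⟩

-- Bellman-Ford-side invariants
def BFInv (board : List String) (LXn LYn : Nat) (start : Int × Int) (INF : Nat)
    (g : List (List Nat)) : Prop :=
  ShapeG LXn LYn g ∧
  dgetB g start.1 start.2 = 0 ∧
  (∀ c, inbP (LXn : Int) (LYn : Int) c → dgetB g c.1 c.2 ≤ INF) ∧
  (∀ c, inbP (LXn : Int) (LYn : Int) c → dgetB g c.1 c.2 < INF →
    ReachL board (LXn : Int) (LYn : Int) start (dgetB g c.1 c.2) c)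

theorem dget_set_self (g : List (List Nat)) (x y : Int) (k : Nat)
    (h : dgetB g x y ≠ 0) : dgetB (dsetB g x y k) x y = k :=
  pvGridGet_set_self k h

theorem dget_set_ne (g : List (List Nat)) (x y a b : Int) (k : Nat)
    (h : ¬(a.toNat = x.toNat ∧ b.toNat = y.toNat)) :
    dgetB (dsetB g x y k) a b = dgetB g a b :=
  pvGridGet_set_ne _ _ _ _ _ _ _ h

theorem bfWrite_inv (board : List String) (LXn LYn : Nat) (start : Int × Int) (INF : Nat)
    (hst : inbP (LXn : Int) (LYn : Int) start) (g : List (List Nat))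
    (hInv : BFInv board LXn LYn start INF g) (p t : Int × Int)
    (hp : inbP (LXn : Int) (LYn : Int) p)
    (ht : t ∈ succL board (LXn : Int) (LYn : Int) p)
    (hguard : dgetB g p.1 p.2 + 1 < dgetB g t.1 t.2)
    (hpINF : dgetB g p.1 p.2 < INF) :
    BFInv board LXn LYn start INF (dsetB g t.1 t.2 (dgetB g p.1 p.2 + 1)) := by
  obtain ⟨hsh, hz, hb, hs⟩ := hInv
  have htin : inbP (LXn : Int) (LYn : Int) t := succ_inb board _ _ p t hp ht
  have htne : dgetB g t.1 t.2 ≠ 0 := by omega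
  refine ⟨shape_set LXn LYn g _ _ _ hsh, ?_, ?_, ?_⟩
  · by_cases he : start.1.toNat = t.1.toNat ∧ start.2.toNat = t.2.toNat
    · exfalso
      have : start = t := coord_eq start t hst.1 hst.2.2.1 htin.1 htin.2.2.1 he.1 he.2
      rw [← this] at hguard
      omega
    · rw [dget_set_ne g t.1 t.2 start.1 start.2 _ he]
      exact hz
  · intro c hc
    by_cases he : c.1.toNat = t.1.toNat ∧ c.2.toNat = t.2.toNat
    · have hct : c = t := coord_eq c t hc.1 hc.2.2.1 htin.1 htin.2.2.1 he.1 he.2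
      subst hct
      rw [dget_set_self g c.1 c.2 _ htne]
      omega
    · rw [dget_set_ne g t.1 t.2 c.1 c.2 _ he]
      exact hb c hc
  · intro c hc hlt
    by_cases he : c.1.toNat = t.1.toNat ∧ c.2.toNat = t.2.toNat
    · have hct : c = t := coord_eq c t hc.1 hc.2.2.1 htin.1 htin.2.2.1 he.1 he.2
      subst hct
      rw [dget_set_self g c.1 c.2 _ htne]
      exact reach_step board _ _ start _ p c (hs p hp hpINF) ht
    · rw [dget_set_ne g t.1 t.2 c.1 c.2 _ he] at hlt ⊢
      exact hs c hc hlt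

theorem bfInner_inv (board : List String) (LXn LYn : Nat) (start : Int × Int) (INF : Nat)
    (hst : inbP (LXn : Int) (LYn : Int) start) (p : Int × Int)
    (hp : inbP (LXn : Int) (LYn : Int) p) (D : Nat) (hDINF : D < INF) :
    ∀ (ms : List (Int × Int)) (s : List (List Nat) × Bool),
      (∀ m ∈ ms, m ∈ movesB) →
      BFInv board LXn LYn start INF s.1 → dgetB s.1 p.1 p.2 = D →
      BFInv board LXn LYn start INF
        ((ms.foldl (fun s2 m =>
          let t := slideB board (LXn : Int) (LYn : Int) m.1 m.2
            (slideFuelB (LXn : Int) (LYn : Int) p.1 p.2) p.1 p.2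
          if dgetB s2.1 p.1 p.2 + 1 < dgetB s2.1 t.1 t.2 then
            (dsetB s2.1 t.1 t.2 (dgetB s2.1 p.1 p.2 + 1), true)
          else s2) s).1) ∧
      dgetB ((ms.foldl (fun s2 m =>
          let t := slideB board (LXn : Int) (LYn : Int) m.1 m.2
            (slideFuelB (LXn : Int) (LYn : Int) p.1 p.2) p.1 p.2
          if dgetB s2.1 p.1 p.2 + 1 < dgetB s2.1 t.1 t.2 then
            (dsetB s2.1 t.1 t.2 (dgetB s2.1 p.1 p.2 + 1), true)
          else s2) s).1) p.1 p.2 = D := by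
  intro ms
  induction ms with
  | nil => intro s _ hInv hD; exact ⟨hInv, hD⟩
  | cons m rest ih =>
    intro s hms hInv hD
    simp only [List.foldl_cons]
    by_cases hg : dgetB s.1 p.1 p.2 + 1 <
        dgetB s.1 (slideB board (LXn : Int) (LYn : Int) m.1 m.2
          (slideFuelB (LXn : Int) (LYn : Int) p.1 p.2) p.1 p.2).1
          (slideB board (LXn : Int) (LYn : Int) m.1 m.2
          (slideFuelB (LXn : Int) (LYn : Int) p.1 p.2) p.1 p.2).2
    · rw [if_pos hg]
      have htmem : (slideB board (LXn : Int) (LYn : Int) m.1 m.2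
          (slideFuelB (LXn : Int) (LYn : Int) p.1 p.2) p.1 p.2)
          ∈ succL board (LXn : Int) (LYn : Int) p :=
        List.mem_map.mpr ⟨m, hms m (by simp), rfl⟩
      have hpne : ¬(p.1.toNat = (slideB board (LXn : Int) (LYn : Int) m.1 m.2
          (slideFuelB (LXn : Int) (LYn : Int) p.1 p.2) p.1 p.2).1.toNat ∧
          p.2.toNat = (slideB board (LXn : Int) (LYn : Int) m.1 m.2
          (slideFuelB (LXn : Int) (LYn : Int) p.1 p.2) p.1 p.2).2.toNat) := by
        intro he
        have htin := succ_inb board _ _ p _ hp htmem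
        have : p = _ := coord_eq p _ hp.1 hp.2.2.1 htin.1 htin.2.2.1 he.1 he.2
        rw [← this] at hg
        omega
      have hinv' := bfWrite_inv board LXn LYn start INF hst s.1 hInv p _ hp htmem hg
        (by rw [hD]; exact hDINF)
      have hD' : dgetB (dsetB s.1
          (slideB board (LXn : Int) (LYn : Int) m.1 m.2
            (slideFuelB (LXn : Int) (LYn : Int) p.1 p.2) p.1 p.2).1
          (slideB board (LXn : Int) (LYn : Int) m.1 m.2
            (slideFuelB (LXn : Int) (LYn : Int) p.1 p.2) p.1 p.2).2
          (dgetB s.1 p.1 p.2 + 1)) p.1 p.2 = D := by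
        rw [dget_set_ne _ _ _ _ _ _ hpne]
        exact hD
      exact ih _ (fun m' hm' => hms m' (by simp [hm'])) hinv' hD'
    · rw [if_neg hg]
      exact ih s (fun m' hm' => hms m' (by simp [hm'])) hInv hD

theorem bfRelax_inv (board : List String) (LXn LYn : Nat) (start : Int × Int) (INF : Nat)
    (hst : inbP (LXn : Int) (LYn : Int) start) (p : Int × Int)
    (hp : inbP (LXn : Int) (LYn : Int) p) (s : List (List Nat) × Bool)
    (hInv : BFInv board LXn LYn start INF s.1) :
    BFInv board LXn LYn start INF (bfRelax board (LXn : Int) (LYn : Int) INF p s).1 := by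
  unfold bfRelax
  split
  · next hg =>
    exact (bfInner_inv board LXn LYn start INF hst p hp (dgetB s.1 p.1 p.2) hg movesB s
      (fun _ h => h) hInv rfl).1
  · exact hInv

theorem bfPass_inv (board : List String) (LXn LYn : Nat) (start : Int × Int) (INF : Nat)
    (hst : inbP (LXn : Int) (LYn : Int) start) :
    ∀ (scan : List (Int × Int)) (s : List (List Nat) × Bool),
      (∀ p ∈ scan, inbP (LXn : Int) (LYn : Int) p) →
      BFInv board LXn LYn start INF s.1 →
      BFInv board LXn LYn start INF
        ((scan.foldl (fun s p => bfRelax board (LXn : Int) (LYn : Int) INF p s) s).1) := by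
  intro scan
  induction scan with
  | nil => intro s _ hInv; exact hInv
  | cons p rest ih =>
    intro s hmem hInv
    simp only [List.foldl_cons]
    exact ih _ (fun q hq => hmem q (by simp [hq]))
      (bfRelax_inv board LXn LYn start INF hst p (hmem p (by simp)) s hInv)

theorem bfLoop_inv (board : List String) (LXn LYn : Nat) (start : Int × Int) (INF : Nat)
    (hst : inbP (LXn : Int) (LYn : Int) start) (scan : List (Int × Int))
    (hmem : ∀ p ∈ scan, inbP (LXn : Int) (LYn : Int) p) :
    ∀ (n : Nat) (g : List (List Nat)), pvGridSum g ≤ n →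
      BFInv board LXn LYn start INF g →
      BFInv board LXn LYn start INF (bfLoop board (LXn : Int) (LYn : Int) INF scan g) := by
  intro n
  induction n with
  | zero =>
    intro g hn hInv
    rw [bfLoop]
    split
    · next h =>
      exfalso
      have := pvBfPassDec board (LXn : Int) (LYn : Int) INF scan g h
      omega
    · exact bfPass_inv board LXn LYn start INF hst scan (g, false) hmem hInv
  | succ n ih =>
    intro g hn hInv
    rw [bfLoop]
    split
    · next h =>
      have hdec := pvBfPassDec board (LXn : Int) (LYn : Int) INF scan g h
      exact ih _ (by omega)
        (bfPass_inv board LXn LYn start INF hst scan (g, false) hmem hInv)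
    · exact bfPass_inv board LXn LYn start INF hst scan (g, false) hmem hInv

-- fixpoint extraction
theorem bfInner_mono (board : List String) (LX LY : Int) (p : Int × Int) :
    ∀ (ms : List (Int × Int)) (s : List (List Nat) × Bool), s.2 = true →
      ((ms.foldl (fun s2 m =>
        let t := slideB board LX LY m.1 m.2 (slideFuelB LX LY p.1 p.2) p.1 p.2
        if dgetB s2.1 p.1 p.2 + 1 < dgetB s2.1 t.1 t.2 then
          (dsetB s2.1 t.1 t.2 (dgetB s2.1 p.1 p.2 + 1), true)
        else s2) s).2) = true := by
  intro ms
  induction ms with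
  | nil => intro s h; exact h
  | cons m rest ih =>
    intro s h
    simp only [List.foldl_cons]
    split
    · exact ih _ rfl
    · exact ih s h

theorem bfInner_false (board : List String) (LX LY : Int) (p : Int × Int) :
    ∀ (ms : List (Int × Int)) (s : List (List Nat) × Bool),
      ((ms.foldl (fun s2 m =>
        let t := slideB board LX LY m.1 m.2 (slideFuelB LX LY p.1 p.2) p.1 p.2
        if dgetB s2.1 p.1 p.2 + 1 < dgetB s2.1 t.1 t.2 then
          (dsetB s2.1 t.1 t.2 (dgetB s2.1 p.1 p.2 + 1), true)
        else s2) s).2) = false →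
      (ms.foldl (fun s2 m =>
        let t := slideB board LX LY m.1 m.2 (slideFuelB LX LY p.1 p.2) p.1 p.2
        if dgetB s2.1 p.1 p.2 + 1 < dgetB s2.1 t.1 t.2 then
          (dsetB s2.1 t.1 t.2 (dgetB s2.1 p.1 p.2 + 1), true)
        else s2) s) = s ∧
      ∀ m ∈ ms,
        dgetB s.1 (slideB board LX LY m.1 m.2 (slideFuelB LX LY p.1 p.2) p.1 p.2).1
          (slideB board LX LY m.1 m.2 (slideFuelB LX LY p.1 p.2) p.1 p.2).2
          ≤ dgetB s.1 p.1 p.2 + 1 := by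
  intro ms
  induction ms with
  | nil => intro s _; exact ⟨rfl, by simp⟩
  | cons m rest ih =>
    intro s h
    simp only [List.foldl_cons] at h ⊢
    by_cases hg : dgetB s.1 p.1 p.2 + 1 <
        dgetB s.1 (slideB board LX LY m.1 m.2 (slideFuelB LX LY p.1 p.2) p.1 p.2).1
          (slideB board LX LY m.1 m.2 (slideFuelB LX LY p.1 p.2) p.1 p.2).2
    · exfalso
      rw [if_pos hg] at h
      rw [bfInner_mono board LX LY p rest _ rfl] at h
      exact Bool.true_eq_false.mp h
    · rw [if_neg hg] at h ⊢
      obtain ⟨h1, h2⟩ := ih s h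
      refine ⟨h1, ?_⟩
      intro m' hm'
      rcases List.mem_cons.mp hm' with h' | h'
      · subst h'; omega
      · exact h2 m' h'

theorem bfRelax_false (board : List String) (LX LY : Int) (INF : Nat) (p : Int × Int)
    (s : List (List Nat) × Bool) (h : (bfRelax board LX LY INF p s).2 = false) :
    bfRelax board LX LY INF p s = s ∧
    (dgetB s.1 p.1 p.2 < INF → ∀ t ∈ succL board LX LY p,
      dgetB s.1 t.1 t.2 ≤ dgetB s.1 p.1 p.2 + 1) := by
  unfold bfRelax at h ⊢
  split at h
  · next hg =>
    rw [if_pos hg]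
    obtain ⟨h1, h2⟩ := bfInner_false board LX LY p movesB s h
    refine ⟨h1, fun _ t ht => ?_⟩
    obtain ⟨m, hm, hmt⟩ := List.mem_map.mp ht
    exact hmt ▸ h2 m hm
  · next hg =>
    rw [if_neg hg]
    exact ⟨rfl, fun h' => absurd h' hg⟩

theorem bfPassFold_false (board : List String) (LX LY : Int) (INF : Nat) :
    ∀ (scan : List (Int × Int)) (s : List (List Nat) × Bool),
      ((scan.foldl (fun s p => bfRelax board LX LY INF p s) s).2) = false →
      (scan.foldl (fun s p => bfRelax board LX LY INF p s) s) = s ∧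
      ∀ p ∈ scan, dgetB s.1 p.1 p.2 < INF → ∀ t ∈ succL board LX LY p,
        dgetB s.1 t.1 t.2 ≤ dgetB s.1 p.1 p.2 + 1 := by
  intro scan
  induction scan with
  | nil => intro s _; exact ⟨rfl, by simp⟩
  | cons p rest ih =>
    intro s h
    simp only [List.foldl_cons] at h ⊢
    obtain ⟨h1, h2⟩ := ih (bfRelax board LX LY INF p s) h
    have hr2 : (bfRelax board LX LY INF p s).2 = false := by rw [h1] at h; exact h
    obtain ⟨hr, hp⟩ := bfRelax_false board LX LY INF p s hr2
    rw [hr] at h1 h2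
    refine ⟨by rw [hr]; exact h1, ?_⟩
    intro q hq
    rcases List.mem_cons.mp hq with h' | h'
    · subst h'; exact hp
    · exact h2 q h'

theorem bfLoop_fix (board : List String) (LX LY : Int) (INF : Nat) (scan : List (Int × Int)) :
    ∀ (n : Nat) (g : List (List Nat)), pvGridSum g ≤ n →
      ∀ p ∈ scan, dgetB (bfLoop board LX LY INF scan g) p.1 p.2 < INF →
        ∀ t ∈ succL board LX LY p,
          dgetB (bfLoop board LX LY INF scan g) t.1 t.2
            ≤ dgetB (bfLoop board LX LY INF scan g) p.1 p.2 + 1 := by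
  intro n
  induction n with
  | zero =>
    intro g hn
    rw [bfLoop]
    split
    · next h =>
      exfalso
      have := pvBfPassDec board LX LY INF scan g h
      omega
    · next h =>
      have h' : (bfPass board LX LY INF scan g).2 = false := Bool.eq_false_iff.mpr h
      obtain ⟨h1, h2⟩ := bfPassFold_false board LX LY INF scan (g, false) h'
      intro p hp
      have hg1 : (bfPass board LX LY INF scan g).1 = g := by
        unfold bfPass; rw [h1]
      rw [hg1]
      exact h2 p hp
  | succ n ih =>
    intro g hn
    rw [bfLoop]
    split
    · next h =>
      have hdec := pvBfPassDec board LX LY INF scan g h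
      exact ih _ (by omega)
    · next h =>
      have h' : (bfPass board LX LY INF scan g).2 = false := Bool.eq_false_iff.mpr h
      obtain ⟨h1, h2⟩ := bfPassFold_false board LX LY INF scan (g, false) h'
      intro p hp
      have hg1 : (bfPass board LX LY INF scan g).1 = g := by
        unfold bfPass; rw [h1]
      rw [hg1]
      exact h2 p hp

theorem mem_bfScan (LXn LYn : Nat) (c : Int × Int) :
    c ∈ bfScan LXn LYn ↔ inbP (LXn : Int) (LYn : Int) c := by
  unfold bfScan inbP
  constructor
  · intro h
    obtain ⟨y, hy, hmem⟩ := List.mem_flatMap.mp h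
    obtain ⟨x, hx, rfl⟩ := List.mem_map.mp hmem
    rw [List.mem_range] at hy hx
    refine ⟨Int.natCast_nonneg x, ?_, Int.natCast_nonneg y, ?_⟩
    · show (x : Int) < (LXn : Int)
      exact_mod_cast hx
    · show (y : Int) < (LYn : Int)
      exact_mod_cast hy
  · rintro ⟨h1, h2, h3, h4⟩
    refine List.mem_flatMap.mpr ⟨c.2.toNat, List.mem_range.mpr (by omega),
      List.mem_map.mpr ⟨c.1.toNat, List.mem_range.mpr (by omega), ?_⟩⟩
    cases c
    simp only [Prod.mk.injEq]
    constructor <;> omega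

theorem bf_complete (board : List String) (LXn LYn : Nat) (start : Int × Int) (INF : Nat)
    (hst : inbP (LXn : Int) (LYn : Int) start) (gF : List (List Nat))
    (hz : dgetB gF start.1 start.2 = 0)
    (hb : ∀ c, inbP (LXn : Int) (LYn : Int) c → dgetB gF c.1 c.2 ≤ INF)
    (hfix : ∀ p ∈ bfScan LXn LYn, dgetB gF p.1 p.2 < INF →
      ∀ t ∈ succL board (LXn : Int) (LYn : Int) p,
        dgetB gF t.1 t.2 ≤ dgetB gF p.1 p.2 + 1) :
    ∀ (k : Nat) (c : Int × Int), ReachL board (LXn : Int) (LYn : Int) start k c →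
      dgetB gF c.1 c.2 ≤ k := by
  intro k
  induction k with
  | zero => intro c h; rw [h, hz]
  | succ n ih =>
    intro c h
    rcases h with h | ⟨p, hp, hc⟩
    · exact le_trans (ih c h) (Nat.le_succ n)
    · have hpin := reach_inb board _ _ start hst n p hp
      by_cases hbig : INF ≤ n + 1
      · exact le_trans (hb c (reach_inb board _ _ start hst (n+1) c (Or.inr ⟨p, hp, hc⟩))) hbig
      · have hdp : dgetB gF p.1 p.2 ≤ n := ih p hp
        have := hfix p ((mem_bfScan LXn LYn p).mpr hpin) (by omega) c hc
        omega

-- bfBest characterization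
theorem bfBest_le_init (board : List String) (g : List (List Nat)) :
    ∀ (scan : List (Int × Int)) (b0 : Nat), bfBest board scan g b0 ≤ b0 := by
  intro scan
  induction scan with
  | nil => intro b0; exact le_refl _
  | cons p rest ih =>
    intro b0
    unfold bfBest at ih ⊢
    simp only [List.foldl_cons]
    refine le_trans (ih _) ?_
    split
    · next h => exact le_of_lt h.2
    · exact le_refl _

theorem bfBest_le_mem (board : List String) (g : List (List Nat)) :
    ∀ (scan : List (Int × Int)) (b0 : Nat) (p : Int × Int), p ∈ scan →
      boardAtB board p.1 p.2 = 'G' → bfBest board scan g b0 ≤ dgetB g p.1 p.2 := by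
  intro scan
  induction scan with
  | nil => intro b0 p hp; simp at hp
  | cons q rest ih =>
    intro b0 p hp hG
    unfold bfBest at ih ⊢
    simp only [List.foldl_cons]
    rcases List.mem_cons.mp hp with h | h
    · subst h
      refine le_trans (bfBest_le_init board g rest _) ?_
      split
      · next h' => exact le_refl _
      · next h' =>
        push_neg at h'
        exact le_of_not_gt (fun hlt => absurd (h' hG) (by omega))
    · exact ih _ p h hG

theorem bfBest_cases (board : List String) (g : List (List Nat)) :
    ∀ (scan : List (Int × Int)) (b0 : Nat),
      bfBest board scan g b0 = b0 ∨
      ∃ p ∈ scan, boardAtB board p.1 p.2 = 'G' ∧ bfBest board scan g b0 = dgetB g p.1 p.2 := by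
  intro scan
  induction scan with
  | nil => intro b0; exact Or.inl rfl
  | cons q rest ih =>
    intro b0
    unfold bfBest at ih ⊢
    simp only [List.foldl_cons]
    by_cases hg : boardAtB board q.1 q.2 = 'G' ∧ dgetB g q.1 q.2 < b0
    · rw [if_pos hg]
      rcases ih (dgetB g q.1 q.2) with h | ⟨p, hp, hG, he⟩
      · exact Or.inr ⟨q, by simp, hg.1, h⟩
      · exact Or.inr ⟨p, by simp [hp], hG, he⟩
    · rw [if_neg hg]
      rcases ih b0 with h | ⟨p, hp, hG, he⟩
      · exact Or.inl h
      · exact Or.inr ⟨p, by simp [hp], hG, he⟩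

-- set-level characterization of the level-expansion folds
def destsL (board : List String) (LX LY : Int) (p : Int × Int) (ms : List (Int × Int)) :
    List (Int × Int) :=
  ms.map (fun m => slideB board LX LY m.1 m.2 (slideFuelB LX LY p.1 p.2) p.1 p.2)

theorem destsL_movesB (board : List String) (LX LY : Int) (p : Int × Int) :
    destsL board LX LY p movesB = succL board LX LY p := rfl

theorem destsL_inb (board : List String) (LXn LYn : Nat) (p c : Int × Int)
    (hp : inbP (LXn : Int) (LYn : Int) p) (ms : List (Int × Int))
    (hc : c ∈ destsL board (LXn : Int) (LYn : Int) p ms) :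
    inbP (LXn : Int) (LYn : Int) c := by
  obtain ⟨m, _, hm⟩ := List.mem_map.mp hc
  exact hm ▸ slide_inb board _ _ m.1 m.2 _ p.1 p.2 hp.1 hp.2.1 hp.2.2.1 hp.2.2.2

theorem pvExpandChar (board : List String) (LXn LYn : Nat) (p : Int × Int)
    (hp : inbP (LXn : Int) (LYn : Int) p) :
    ∀ (ms : List (Int × Int)) (vb : List (List Bool)) (acc : List (Int × Int)),
      ShapeG LXn LYn vb →
      ∃ vb' new,
        (ms.foldl (fun s m =>
          let t := slideB board (LXn : Int) (LYn : Int) m.1 m.2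
            (slideFuelB (LXn : Int) (LYn : Int) p.1 p.2) p.1 p.2
          if bgetB s.1 t.1 t.2 = false then (bsetB s.1 t.1 t.2 true, s.2 ++ [t]) else s)
          (vb, acc)) = (vb', acc ++ new) ∧
        (∀ c, inbP (LXn : Int) (LYn : Int) c →
          (bgetB vb' c.1 c.2 = true ↔ bgetB vb c.1 c.2 = true ∨
            c ∈ destsL board (LXn : Int) (LYn : Int) p ms)) ∧
        (∀ c, c ∈ new ↔ (bgetB vb c.1 c.2 = false ∧
          c ∈ destsL board (LXn : Int) (LYn : Int) p ms)) ∧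
        ShapeG LXn LYn vb' := by
  intro ms
  induction ms with
  | nil =>
    intro vb acc hsh
    refine ⟨vb, [], by simp, ?_, ?_, hsh⟩
    · intro c _
      simp [destsL]
    · intro c
      simp [destsL]
  | cons m rest ih =>
    intro vb acc hsh
    simp only [List.foldl_cons]
    have htin : inbP (LXn : Int) (LYn : Int)
        (slideB board (LXn : Int) (LYn : Int) m.1 m.2
          (slideFuelB (LXn : Int) (LYn : Int) p.1 p.2) p.1 p.2) :=
      slide_inb board _ _ m.1 m.2 _ p.1 p.2 hp.1 hp.2.1 hp.2.2.1 hp.2.2.2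
    set t := slideB board (LXn : Int) (LYn : Int) m.1 m.2
      (slideFuelB (LXn : Int) (LYn : Int) p.1 p.2) p.1 p.2 with ht
    have hdests : ∀ c, c ∈ destsL board (LXn : Int) (LYn : Int) p (m :: rest) ↔
        c = t ∨ c ∈ destsL board (LXn : Int) (LYn : Int) p rest := by
      intro c
      simp only [destsL, List.map_cons, List.mem_cons]
      try rw [← ht]
      try tauto
    by_cases hg : bgetB vb t.1 t.2 = false
    · rw [if_pos hg]
      obtain ⟨vb', new2, heq, hi, hii, hsh'⟩ :=
        ih (bsetB vb t.1 t.2 true) (acc ++ [t]) (shape_set LXn LYn vb _ _ _ hsh)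
      refine ⟨vb', t :: new2, by rw [heq]; simp, ?_, ?_, hsh'⟩
      · intro c hc
        rw [hi c hc, hdests c]
        have hset : bgetB (bsetB vb t.1 t.2 true) c.1 c.2
            = if c.1.toNat = t.1.toNat ∧ c.2.toNat = t.2.toNat then true
              else bgetB vb c.1 c.2 := by
          split
          · next he =>
            have : c = t := coord_eq c t hc.1 hc.2.2.1 htin.1 htin.2.2.1 he.1 he.2
            subst this
            exact pvGridGet_set_self true (by show bgetB vb t.1 t.2 ≠ true; rw [hg]; simp)
          · next he => exact pvGridGet_set_ne _ _ _ _ _ _ _ he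
        rw [hset]
        by_cases he : c.1.toNat = t.1.toNat ∧ c.2.toNat = t.2.toNat
        · have hct : c = t := coord_eq c t hc.1 hc.2.2.1 htin.1 htin.2.2.1 he.1 he.2
          subst hct
          simp [he]
        · have hne : c ≠ t := by
            intro hcteq; subst hcteq; exact he ⟨rfl, rfl⟩
          simp only [if_neg he]
          tauto
      · intro c
        simp only [List.mem_cons]
        rw [hii c, hdests c]
        by_cases hct : c = t
        · subst hct
          simp [hg]
        · simp only [hct, false_or]
          have key : c ∈ destsL board (LXn : Int) (LYn : Int) p rest →
              bgetB (bsetB vb t.1 t.2 true) c.1 c.2 = bgetB vb c.1 c.2 := by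
            intro hmem
            have hcin : inbP (LXn : Int) (LYn : Int) c :=
              destsL_inb board LXn LYn p c hp rest hmem
            have hne : ¬(c.1.toNat = t.1.toNat ∧ c.2.toNat = t.2.toNat) := by
              intro he
              exact hct (coord_eq c t hcin.1 hcin.2.2.1 htin.1 htin.2.2.1 he.1 he.2)
            exact pvGridGet_set_ne _ _ _ _ _ _ _ hne
          constructor
          · rintro ⟨hbf, hmem⟩
            rw [key hmem] at hbf
            exact ⟨hbf, hmem⟩
          · rintro ⟨hbf, hmem⟩
            rw [key hmem]
            exact ⟨hbf, hmem⟩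
    · rw [if_neg hg]
      have hgt : bgetB vb t.1 t.2 = true := by
        cases hb : bgetB vb t.1 t.2
        · exact absurd hb hg
        · rfl
      obtain ⟨vb', new2, heq, hi, hii, hsh'⟩ := ih vb acc hsh
      refine ⟨vb', new2, heq, ?_, ?_, hsh'⟩
      · intro c hc
        rw [hi c hc, hdests c]
        constructor
        · rintro (h | h)
          · exact Or.inl h
          · exact Or.inr (Or.inr h)
        · rintro (h | h | h)
          · exact Or.inl h
          · subst h; exact Or.inl hgt
          · exact Or.inr h
      · intro c
        rw [hii c, hdests c]
        constructor
        · rintro ⟨hbf, hmem⟩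
          exact ⟨hbf, Or.inr hmem⟩
        · rintro ⟨hbf, hmem⟩
          rcases hmem with hmem | hmem
          · subst hmem
            rw [hgt] at hbf
            exact absurd hbf (by simp)
          · exact ⟨hbf, hmem⟩

theorem pvLevelChar (board : List String) (LXn LYn : Nat) :
    ∀ (cells : List (Int × Int)) (vb : List (List Bool)) (acc : List (Int × Int)),
      (∀ p ∈ cells, inbP (LXn : Int) (LYn : Int) p) → ShapeG LXn LYn vb →
      ∃ vb' new,
        (cells.foldl (fun s c => expandL board (LXn : Int) (LYn : Int) c.1 c.2 s) (vb, acc))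
          = (vb', acc ++ new) ∧
        (∀ c, inbP (LXn : Int) (LYn : Int) c →
          (bgetB vb' c.1 c.2 = true ↔ bgetB vb c.1 c.2 = true ∨
            ∃ p ∈ cells, c ∈ succL board (LXn : Int) (LYn : Int) p)) ∧
        (∀ c, c ∈ new ↔ (bgetB vb c.1 c.2 = false ∧
          ∃ p ∈ cells, c ∈ succL board (LXn : Int) (LYn : Int) p)) ∧
        ShapeG LXn LYn vb' := by
  intro cells
  induction cells with
  | nil =>
    intro vb acc _ hsh
    refine ⟨vb, [], by simp, ?_, ?_, hsh⟩
    · intro c _; simp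
    · intro c; simp
  | cons p rest ih =>
    intro vb acc hmem hsh
    simp only [List.foldl_cons]
    have hpin : inbP (LXn : Int) (LYn : Int) p := hmem p (by simp)
    obtain ⟨vb1, n1, heq1, hi1, hii1, hsh1⟩ :=
      pvExpandChar board LXn LYn p hpin movesB vb acc hsh
    have hEB : expandL board (LXn : Int) (LYn : Int) p.1 p.2 (vb, acc) = (vb1, acc ++ n1) := by
      unfold expandL; exact heq1
    rw [hEB]
    obtain ⟨vb', new2, heq2, hi2, hii2, hsh'⟩ :=
      ih vb1 (acc ++ n1) (fun q hq => hmem q (by simp [hq])) hsh1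
    rw [destsL_movesB] at hi1 hii1
    refine ⟨vb', n1 ++ new2, by rw [heq2]; simp, ?_, ?_, hsh'⟩
    · intro c hc
      rw [hi2 c hc, hi1 c hc]
      simp only [List.mem_cons]
      constructor
      · rintro ((h | h) | h)
        · exact Or.inl h
        · exact Or.inr ⟨p, Or.inl rfl, h⟩
        · obtain ⟨q, hq, hcq⟩ := h
          exact Or.inr ⟨q, Or.inr hq, hcq⟩
      · rintro (h | ⟨q, hq | hq, hcq⟩)
        · exact Or.inl (Or.inl h)
        · subst hq; exact Or.inl (Or.inr hcq)
        · exact Or.inr ⟨q, hq, hcq⟩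
    · intro c
      simp only [List.mem_append, List.mem_cons]
      rw [hii2 c, hii1 c]
      constructor
      · rintro (⟨hbf, hmem'⟩ | ⟨hbf1, q, hq, hcq⟩)
        · exact ⟨hbf, p, Or.inl rfl, hmem'⟩
        · have hcin : inbP (LXn : Int) (LYn : Int) c :=
            succ_inb board _ _ q c (hmem q (by simp [hq])) hcq
          have hbf : bgetB vb c.1 c.2 = false := by
            cases hb : bgetB vb c.1 c.2
            · rfl
            · rw [(hi1 c hcin).mpr (Or.inl hb)] at hbf1
              exact absurd hbf1 (by simp)
          exact ⟨hbf, q, Or.inr hq, hcq⟩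
      · rintro ⟨hbf, q, hq | hq, hcq⟩
        · subst hq
          exact Or.inl ⟨hbf, hcq⟩
        · have hcin : inbP (LXn : Int) (LYn : Int) c :=
            succ_inb board _ _ q c (hmem q (by simp [hq])) hcq
          by_cases hcp : c ∈ succL board (LXn : Int) (LYn : Int) p
          · exact Or.inl ⟨hbf, hcp⟩
          · have hbf1 : bgetB vb1 c.1 c.2 = false := by
              cases hb : bgetB vb1 c.1 c.2
              · rfl
              · rcases (hi1 c hcin).mp hb with h | h
                · rw [h] at hbf; exact absurd hbf (by simp)
                · exact absurd h hcp
            exact Or.inr ⟨hbf1, q, hq, hcq⟩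

-- empty-frontier case: nothing at minimal level d, so nothing is reachable beyond
-- level d-1 and no 'G' is reachable at all; both sides give -1
theorem pvEmptyCase (board : List String) (LXn LYn : Nat) (start : Int × Int)
    (gF : List (List Nat))
    (hS : ∀ c, inbP (LXn : Int) (LYn : Int) c → dgetB gF c.1 c.2 < LXn * LYn + 1 →
      ReachL board (LXn : Int) (LYn : Int) start (dgetB gF c.1 c.2) c)
    (d : Nat) (vb : List (List Bool))
    (hfront : ∀ c, c ∈ ([] : List (Int × Int)) ↔
      (ReachL board (LXn : Int) (LYn : Int) start d c ∧
        ∀ k, k < d → ¬ ReachL board (LXn : Int) (LYn : Int) start k c))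
    (hnoG : ∀ (k : Nat) (c : Int × Int), k < d → ReachL board (LXn : Int) (LYn : Int) start k c →
      boardAtB board c.1 c.2 ≠ 'G') :
    loopL board (LXn : Int) (LYn : Int) [] vb (d : Int)
      = if bfBest board (bfScan LXn LYn) gF (LXn * LYn + 1) < LXn * LYn + 1
        then ((bfBest board (bfScan LXn LYn) gF (LXn * LYn + 1) : Nat) : Int) else -1 := by
  have hempty : ∀ c, ¬(ReachL board (LXn : Int) (LYn : Int) start d c ∧
      ∀ k, k < d → ¬ ReachL board (LXn : Int) (LYn : Int) start k c) := by
    intro c hc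
    have := (hfront c).mpr hc
    simp at this
  match d with
  | 0 =>
    exact absurd ⟨show start = start from rfl, fun k hk => by omega⟩ (hempty start)
  | j + 1 =>
    have hstab : ∀ c, ReachL board (LXn : Int) (LYn : Int) start (j+1) c →
        ReachL board (LXn : Int) (LYn : Int) start j c := by
      intro c h
      by_cases hex : ∃ k, k < j + 1 ∧ ReachL board (LXn : Int) (LYn : Int) start k c
      · obtain ⟨k, hk, hkr⟩ := hex
        exact reach_mono board _ _ start (by omega : k ≤ j) c hkr
      · push_neg at hex
        exact absurd ⟨h, fun k hk => hex k hk⟩ (hempty c)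
    have hall : ∀ p, p ∈ bfScan LXn LYn → boardAtB board p.1 p.2 = 'G' →
        ¬ dgetB gF p.1 p.2 < LXn * LYn + 1 := by
      intro p hp hpG hlt
      have hpin := (mem_bfScan LXn LYn p).mp hp
      have hr := hS p hpin hlt
      have := reach_collapse board (LXn : Int) (LYn : Int) start j hstab _ p hr
      exact hnoG j p (by omega) this hpG
    have hbig : ¬ bfBest board (bfScan LXn LYn) gF (LXn * LYn + 1) < LXn * LYn + 1 := by
      rcases bfBest_cases board gF (bfScan LXn LYn) (LXn * LYn + 1) with h | ⟨p, hp, hpG, he⟩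
      · omega
      · rw [he]
        exact hall p hp hpG
    rw [if_neg hbig]
    simp [loopL]

-- the level-synchronous loop computes exactly B's answer
theorem pvLevelToBF (board : List String) (LXn LYn : Nat) (start : Int × Int)
    (gF : List (List Nat))
    (hst : inbP (LXn : Int) (LYn : Int) start)
    (hS : ∀ c, inbP (LXn : Int) (LYn : Int) c → dgetB gF c.1 c.2 < LXn * LYn + 1 →
      ReachL board (LXn : Int) (LYn : Int) start (dgetB gF c.1 c.2) c)
    (hC : ∀ (k : Nat) (c : Int × Int), ReachL board (LXn : Int) (LYn : Int) start k c →
      dgetB gF c.1 c.2 ≤ k) :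
    ∀ (n : Nat) (front : List (Int × Int)) (vb : List (List Bool)) (d : Nat),
      falsesB vb + front.length ≤ n →
      (∀ c, c ∈ front ↔ (ReachL board (LXn : Int) (LYn : Int) start d c ∧
        ∀ k, k < d → ¬ ReachL board (LXn : Int) (LYn : Int) start k c)) →
      (∀ c, inbP (LXn : Int) (LYn : Int) c →
        (bgetB vb c.1 c.2 = true ↔ ReachL board (LXn : Int) (LYn : Int) start d c)) →
      (∀ (k : Nat) (c : Int × Int), k < d → ReachL board (LXn : Int) (LYn : Int) start k c →
        boardAtB board c.1 c.2 ≠ 'G') →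
      ShapeG LXn LYn vb →
      (front ≠ [] → d + 1 + falsesB vb ≤ LXn * LYn) →
      loopL board (LXn : Int) (LYn : Int) front vb (d : Int)
        = if bfBest board (bfScan LXn LYn) gF (LXn * LYn + 1) < LXn * LYn + 1
          then ((bfBest board (bfScan LXn LYn) gF (LXn * LYn + 1) : Nat) : Int) else -1 := by
  intro n
  induction n with
  | zero =>
    intro front vb d hn hfront hvb hnoG hsh hK
    have hfe : front = [] := List.eq_nil_of_length_eq_zero (by omega)
    subst hfe
    exact pvEmptyCase board LXn LYn start gF hS d vb hfront hnoG
  | succ n ih =>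
    intro front vb d hn hfront hvb hnoG hsh hK
    match front with
    | [] => exact pvEmptyCase board LXn LYn start gF hS d vb hfront hnoG
    | c :: fr =>
      rw [loopL]
      by_cases hG : (c :: fr).any (fun q => boardAtB board q.1 q.2 == 'G')
      · rw [if_pos hG]
        obtain ⟨g, hgmem, hgG⟩ := List.any_eq_true.mp hG
        have hgG' : boardAtB board g.1 g.2 = 'G' := by simpa using hgG
        obtain ⟨hgr, hgmin⟩ := (hfront g).mp hgmem
        have hgin : inbP (LXn : Int) (LYn : Int) g :=
          reach_inb board _ _ start hst d g hgr
        have hdT : d + 1 ≤ LXn * LYn := by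
          have := hK (by simp)
          omega
        have hdg : dgetB gF g.1 g.2 = d := by
          have hle : dgetB gF g.1 g.2 ≤ d := hC d g hgr
          by_contra hne
          have hlt : dgetB gF g.1 g.2 < d := by omega
          exact hgmin _ hlt (hS g hgin (by omega))
        have hlow : ∀ p, inbP (LXn : Int) (LYn : Int) p → boardAtB board p.1 p.2 = 'G' →
            d ≤ dgetB gF p.1 p.2 := by
          intro p hpin hpG
          by_contra hlt
          push_neg at hlt
          exact hnoG _ p hlt (hS p hpin (by omega)) hpG
        have hbLE : bfBest board (bfScan LXn LYn) gF (LXn * LYn + 1) ≤ d := by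
          rw [← hdg]
          exact bfBest_le_mem board gF (bfScan LXn LYn) _ g
            ((mem_bfScan LXn LYn g).mpr hgin) hgG'
        have hbGE : d ≤ bfBest board (bfScan LXn LYn) gF (LXn * LYn + 1) := by
          rcases bfBest_cases board gF (bfScan LXn LYn) (LXn * LYn + 1) with h | ⟨p, hp, hpG, he⟩
          · omega
          · rw [he]
            exact hlow p ((mem_bfScan LXn LYn p).mp hp) hpG
        have hbest : bfBest board (bfScan LXn LYn) gF (LXn * LYn + 1) = d := by omega
        rw [hbest, if_pos (by omega)]
      · rw [if_neg hG]
        have hnoGfront : ∀ q ∈ c :: fr, boardAtB board q.1 q.2 ≠ 'G' := by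
          intro q hq
          have := (List.any_eq_false.mp (Bool.eq_false_iff.mpr hG)) q hq
          simpa using this
        have hfin : ∀ p ∈ c :: fr, inbP (LXn : Int) (LYn : Int) p := by
          intro p hp
          exact reach_inb board _ _ start hst d p ((hfront p).mp hp).1
        obtain ⟨vb', new, heq, hi, hii, hsh'⟩ :=
          pvLevelChar board LXn LYn (c :: fr) vb [] hfin hsh
        have hL : levelL board (LXn : Int) (LYn : Int) (c :: fr) vb = (vb', new) := by
          unfold levelL
          rw [heq]
          simp
        rw [hL]
        have hmeas := levelL_measure board (LXn : Int) (LYn : Int) (c :: fr) vb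
        rw [hL] at hmeas
        simp only at hmeas
        -- new invariants at level d+1
        have hvb' : ∀ q, inbP (LXn : Int) (LYn : Int) q →
            (bgetB vb' q.1 q.2 = true ↔
              ReachL board (LXn : Int) (LYn : Int) start (d+1) q) := by
          intro q hq
          rw [hi q hq, hvb q hq]
          constructor
          · rintro (h | ⟨p, hp, hqp⟩)
            · exact Or.inl h
            · exact Or.inr ⟨p, ((hfront p).mp hp).1, hqp⟩
          · rintro (h | ⟨p, hp, hqp⟩)
            · exact Or.inl h
            · by_cases hmin : ∀ k, k < d → ¬ ReachL board (LXn : Int) (LYn : Int) start k p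
              · exact Or.inr ⟨p, (hfront p).mpr ⟨hp, hmin⟩, hqp⟩
              · push_neg at hmin
                obtain ⟨k, hk, hkr⟩ := hmin
                exact Or.inl (reach_mono board _ _ start (by omega : k + 1 ≤ d) q
                  (reach_step board _ _ start k p q hkr hqp))
        have hfront' : ∀ q, q ∈ new ↔
            (ReachL board (LXn : Int) (LYn : Int) start (d+1) q ∧
              ∀ k, k < d + 1 → ¬ ReachL board (LXn : Int) (LYn : Int) start k q) := by
          intro q
          rw [hii q]
          constructor
          · rintro ⟨hbf, p, hp, hqp⟩
            have hqin : inbP (LXn : Int) (LYn : Int) q :=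
              succ_inb board _ _ p q (hfin p hp) hqp
            have hnd : ¬ ReachL board (LXn : Int) (LYn : Int) start d q := by
              intro h
              rw [(hvb q hqin).mpr h] at hbf
              exact absurd hbf (by simp)
            refine ⟨Or.inr ⟨p, ((hfront p).mp hp).1, hqp⟩, ?_⟩
            intro k hk hkr
            exact hnd (reach_mono board _ _ start (by omega : k ≤ d) q hkr)
          · rintro ⟨hr, hmin⟩
            have hnd : ¬ ReachL board (LXn : Int) (LYn : Int) start d q :=
              hmin d (by omega)
            rcases hr with hr | ⟨p, hp, hqp⟩
            · exact absurd hr hnd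
            · have hpmin : ∀ k, k < d → ¬ ReachL board (LXn : Int) (LYn : Int) start k p := by
                intro k hk hkr
                exact hnd (reach_mono board _ _ start (by omega : k + 1 ≤ d) q
                  (reach_step board _ _ start k p q hkr hqp))
              have hpfront : p ∈ c :: fr := (hfront p).mpr ⟨hp, hpmin⟩
              have hqin : inbP (LXn : Int) (LYn : Int) q :=
                succ_inb board _ _ p q (hfin p hpfront) hqp
              have hbf : bgetB vb q.1 q.2 = false := by
                cases hb : bgetB vb q.1 q.2
                · rfl
                · exact absurd ((hvb q hqin).mp hb) hnd
              exact ⟨hbf, p, hpfront, hqp⟩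
        have hnoG' : ∀ (k : Nat) (q : Int × Int), k < d + 1 →
            ReachL board (LXn : Int) (LYn : Int) start k q →
            boardAtB board q.1 q.2 ≠ 'G' := by
          intro k q hk hkr
          by_cases hkd : k < d
          · exact hnoG k q hkd hkr
          · have hkeq : k = d := by omega
            subst hkeq
            by_cases hmin : ∀ k', k' < k → ¬ ReachL board (LXn : Int) (LYn : Int) start k' q
            · exact hnoGfront q ((hfront q).mpr ⟨hkr, hmin⟩)
            · push_neg at hmin
              obtain ⟨k', hk', hk'r⟩ := hmin
              exact hnoG k' q hk' hk'r
        have hK' : new ≠ [] → (d + 1) + 1 + falsesB vb' ≤ LXn * LYn := by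
          intro hne
          have hlen : 1 ≤ new.length := by
            cases new
            · exact absurd rfl hne
            · simp
          have := hK (by simp)
          omega
        have hrec := ih new vb' (d + 1)
          (by simp only [List.length_cons] at hn; omega)
          hfront' hvb' hnoG' hsh' hK'
        rw [show ((d : Int) + 1) = (((d + 1 : Nat)) : Int) by push_cast; ring]
        exact hrec

-- relating the two robot finders, and extracting the found position's properties
theorem pvRowFind (y : Int) :
    ∀ (l : List Char) (k : Int),
      (PySem.List.enumerate l k).findSome?
        (fun xc => if xc.2 = 'R' then some (xc.1, y) else none)
      = (PySem.List.index? l 'R').map (fun i : Nat => (k + (i : Int), y)) := by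
  intro l
  induction l with
  | nil => intro k; simp [PySem.List.enumerate_nil, PySem.List.index?_eq_idxOf?]
  | cons a rest ih =>
    intro k
    rw [PySem.List.enumerate_cons]
    by_cases ha : a = 'R'
    · subst ha
      rw [PySem.List.index?_cons_self]
      simp [List.findSome?_cons]
    · rw [PySem.List.index?_cons_of_ne rest ha]
      rw [List.findSome?_cons]
      simp only [if_neg ha]
      rw [ih (k + 1)]
      cases h : PySem.List.index? rest 'R' with
      | none => simp [h]
      | some i =>
        simp only [h, Option.map_map, Option.map_some, Function.comp]
        congr 2
        push_cast
        ring

theorem pvFindSwap :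
    ∀ (rows : List String) (n : Int),
      (PySem.List.enumerate rows n).findSome? (fun yl =>
        (PySem.List.enumerate yl.2.toList 0).findSome? (fun xc =>
          if xc.2 = 'R' then some (xc.1, yl.1) else none))
      = ((PySem.List.enumerate rows n).findSome? (fun yl =>
          if 'R' ∈ yl.2.toList then
            some (yl.1, (((PySem.List.index? yl.2.toList 'R').getD 0 : Nat) : Int))
          else none)).map (fun q => (q.2, q.1)) := by
  intro rows
  induction rows with
  | nil => intro n; simp [PySem.List.enumerate_nil]
  | cons r rest ih =>
    intro n
    rw [PySem.List.enumerate_cons, List.findSome?_cons, List.findSome?_cons]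
    rw [pvRowFind n r.toList 0]
    cases h : PySem.List.index? r.toList 'R' with
    | none =>
      have hnm : 'R' ∉ r.toList := (PySem.List.index?_eq_none_iff _ _).mp h
      simp only [h, Option.map_none, if_neg hnm]
      exact ih (n + 1)
    | some i =>
      have hm : 'R' ∈ r.toList := (PySem.List.index?_isSome_iff _ _).mp (by rw [h]; rfl)
      simp [h, hm]

theorem find_robo_eq_swap (board : List String) :
    find_robo board = (bfFind board).map (fun q => (q.2, q.1)) :=
  pvFindSwap board 0

theorem pvIndexIdx : ∀ (l : List Char) (i : Nat),
    PySem.List.index? l 'R' = some i → 'R' ∈ l ∧ i = l.idxOf 'R' := by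
  intro l
  induction l with
  | nil => intro i h; rw [PySem.List.index?_eq_idxOf?] at h; simp at h
  | cons a rest ih =>
    intro i h
    by_cases ha : a = 'R'
    · subst ha
      rw [PySem.List.index?_cons_self] at h
      have hi0 : i = 0 := by simpa using h.symm
      subst hi0
      exact ⟨by simp, by simp [List.idxOf_cons_self]⟩
    · rw [PySem.List.index?_cons_of_ne rest ha] at h
      cases h' : PySem.List.index? rest 'R' with
      | none => rw [h'] at h; simp at h
      | some j =>
        rw [h'] at h
        simp only [Option.map_some, Option.some.injEq] at h
        obtain ⟨hm, hj⟩ := ih j h'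
        subst h
        refine ⟨by simp [hm], ?_⟩
        rw [List.idxOf_cons_ne _ ha]
        omega

theorem pvFindSpec :
    ∀ (rows : List String) (n : Int) (x y : Int),
      (PySem.List.enumerate rows n).findSome? (fun yl =>
        (PySem.List.enumerate yl.2.toList 0).findSome? (fun xc =>
          if xc.2 = 'R' then some (xc.1, yl.1) else none)) = some (x, y) →
      n ≤ y ∧ (y - n).toNat < rows.length ∧ ∃ row, row ∈ rows ∧
        rows.find? (fun r => decide ('R' ∈ r.toList)) = some row ∧ 'R' ∈ row.toList ∧
        x = (row.toList.idxOf 'R' : Int) := by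
  intro rows
  induction rows with
  | nil => intro n x y h; simp [PySem.List.enumerate_nil] at h
  | cons r rest ih =>
    intro n x y h
    rw [PySem.List.enumerate_cons, List.findSome?_cons] at h
    rw [pvRowFind n r.toList 0] at h
    cases hidx : PySem.List.index? r.toList 'R' with
    | some i =>
      rw [hidx] at h
      simp only [Option.map_some, Option.some.injEq] at h
      obtain ⟨hm, hi⟩ := pvIndexIdx r.toList i hidx
      rw [Prod.mk.injEq] at h
      have hx : x = (i : Int) := by omega
      have hy : y = n := h.2.symm
      refine ⟨by omega, by simp; omega, r, by simp, ?_, hm, by rw [hx, hi]⟩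
      rw [List.find?_cons_of_pos (by simpa using hm)]
    | none =>
      rw [hidx] at h
      simp only [Option.map_none] at h
      have hnm : 'R' ∉ r.toList := (PySem.List.index?_eq_none_iff _ _).mp hidx
      obtain ⟨h1, h2, row, hrow, hfind, hmem, hx⟩ := ih (n + 1) x y h
      refine ⟨by omega, by simp; omega, row, by simp [hrow], ?_, hmem, hx⟩
      rw [List.find?_cons_of_neg (by simpa using hnm)]
      exact hfind

-- initial-state facts
theorem pvInitVb (LXn LYn : Nat) (start : Int × Int)
    (hst : inbP (LXn : Int) (LYn : Int) start) :
    ∀ c, inbP (LXn : Int) (LYn : Int) c →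
      (bgetB (bsetB (List.replicate LYn (List.replicate LXn false)) start.1 start.2 true)
        c.1 c.2 = true ↔ c = start) := by
  obtain ⟨hs1, hs2, hs3, hs4⟩ := id hst
  intro c hc
  obtain ⟨hc1, hc2, hc3, hc4⟩ := id hc
  by_cases he : c.1.toNat = start.1.toNat ∧ c.2.toNat = start.2.toNat
  · have hcs : c = start := coord_eq c start hc.1 hc.2.2.1 hst.1 hst.2.2.1 he.1 he.2
    subst hcs
    rw [show bgetB (bsetB (List.replicate LYn (List.replicate LXn false)) c.1 c.2 true) c.1 c.2
        = pvGridGet true (pvGridSet (List.replicate LYn (List.replicate LXn false))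
          c.1.toNat c.2.toNat true) c.1.toNat c.2.toNat from rfl]
    rw [pvGridGet_set_self true (by
      rw [pvGridGet_replicate]
      rw [if_pos ⟨by omega, by omega⟩]
      simp)]
    simp
  · rw [show bgetB (bsetB (List.replicate LYn (List.replicate LXn false)) start.1 start.2 true)
        c.1 c.2
        = pvGridGet true (pvGridSet (List.replicate LYn (List.replicate LXn false))
          start.1.toNat start.2.toNat true) c.1.toNat c.2.toNat from rfl]
    rw [pvGridGet_set_ne _ _ _ _ _ _ _ he, pvGridGet_replicate,
      if_pos ⟨by omega, by omega⟩]
    constructor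
    · intro h; exact absurd h (by simp)
    · intro h
      subst h
      exact absurd ⟨rfl, rfl⟩ he

theorem pvCountPRepl (n : Nat) : (List.replicate n false).countP (· == false) = n := by
  induction n with
  | zero => rfl
  | succ m ih =>
    rw [List.replicate_succ, List.countP_cons, ih]
    simp

theorem pvCountRep (LXn LYn : Nat) :
    pvGridCount (· == false) (List.replicate LYn (List.replicate LXn false)) = LYn * LXn := by
  unfold pvGridCount
  rw [List.map_replicate, pvCountPRepl LXn, List.sum_replicate, smul_eq_mul]

theorem pvInitFalses (LXn LYn : Nat) (start : Int × Int)
    (hst : inbP (LXn : Int) (LYn : Int) start) :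
    falsesB (bsetB (List.replicate LYn (List.replicate LXn false)) start.1 start.2 true) + 1
      = LYn * LXn := by
  obtain ⟨hs1, hs2, hs3, hs4⟩ := id hst
  unfold falsesB bsetB
  rw [pvGridCount_set (d := true) (p := (· == false)) _ _ _ true
    (by rw [pvGridGet_replicate, if_pos ⟨by omega, by omega⟩]; simp)
    (by rw [pvGridGet_replicate, if_pos ⟨by omega, by omega⟩]; rfl)
    (by simp)]
  exact pvCountRep LXn LYn

theorem pvInitBF (board : List String) (LXn LYn : Nat) (start : Int × Int) (INF : Nat)
    (hst : inbP (LXn : Int) (LYn : Int) start) (hINF : 1 ≤ INF) :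
    BFInv board LXn LYn start INF
      (dsetB (List.replicate LYn (List.replicate LXn INF)) start.1 start.2 0) := by
  have hget : ∀ c : Int × Int, inbP (LXn : Int) (LYn : Int) c →
      dgetB (dsetB (List.replicate LYn (List.replicate LXn INF)) start.1 start.2 0) c.1 c.2
        = if c = start then 0 else INF := by
    obtain ⟨hs1, hs2, hs3, hs4⟩ := id hst
    intro c hc
    obtain ⟨hc1, hc2, hc3, hc4⟩ := id hc
    by_cases he : c.1.toNat = start.1.toNat ∧ c.2.toNat = start.2.toNat
    · have hcs : c = start := coord_eq c start hc.1 hc.2.2.1 hst.1 hst.2.2.1 he.1 he.2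
      subst hcs
      rw [if_pos rfl]
      exact pvGridGet_set_self 0 (by
        rw [pvGridGet_replicate, if_pos ⟨by omega, by omega⟩]; omega)
    · rw [if_neg (fun h => he (by rw [h]; exact ⟨rfl, rfl⟩))]
      rw [show dgetB (dsetB (List.replicate LYn (List.replicate LXn INF)) start.1 start.2 0)
          c.1 c.2 = pvGridGet 0 (pvGridSet (List.replicate LYn (List.replicate LXn INF))
            start.1.toNat start.2.toNat 0) c.1.toNat c.2.toNat from rfl]
      rw [pvGridGet_set_ne _ _ _ _ _ _ _ he, pvGridGet_replicate,
        if_pos ⟨by omega, by omega⟩]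
  refine ⟨shape_set LXn LYn _ _ _ _ (shape_replicate LXn LYn INF), ?_, ?_, ?_⟩
  · rw [hget start hst, if_pos rfl]
  · intro c hc
    rw [hget c hc]
    split
    · omega
    · exact le_refl _
  · intro c hc hlt
    rw [hget c hc] at hlt ⊢
    split at hlt
    · next h =>
      subst h
      rw [if_pos rfl]
      rfl
    · next h => omega

-- ===== VERDICT (by name: the statement is the Claim_ definition above) =====
theorem solution_spec : Claim_equal_solution := by
  unfold Claim_equal_solution
  intro board _ hPre
  obtain ⟨hne, hrows, hR, hfirst⟩ := hPre
  unfold Spec_solution solution solution_alt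
  rw [find_robo_eq_swap board]
  cases hf : bfFind board with
  | none => simp
  | some ryx =>
    obtain ⟨ry, rx⟩ := ryx
    simp only [Option.map_some, PySem.Str.len_eq, Int.toNat_natCast]
    have hfr : find_robo board = some (rx, ry) := by
      rw [find_robo_eq_swap board, hf]; rfl
    obtain ⟨hy1, hylt, row, hrowmem, hfind, hRrow, hxeq⟩ := pvFindSpec board 0 rx ry hfr
    set LXn := (board.getD 0 "").toList.length with hLXn
    set LYn := board.length with hLYn
    have hx1 : 0 ≤ rx := by rw [hxeq]; exact Int.natCast_nonneg _
    have hx2 : rx < (LXn : Int) := by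
      have hlt := hfirst row hrowmem hfind
      rw [hxeq]
      exact_mod_cast hlt
    have hy2 : ry < (LYn : Int) := by omega
    have hstart : inbP (LXn : Int) (LYn : Int) (rx, ry) := ⟨hx1, hx2, hy1, hy2⟩
    have hInv0 := pvInitBF board LXn LYn (rx, ry) (LXn * LYn + 1) hstart (by omega)
    have hInvF := bfLoop_inv board LXn LYn (rx, ry) (LXn * LYn + 1) hstart (bfScan LXn LYn)
      (fun p hp => (mem_bfScan LXn LYn p).mp hp)
      (pvGridSum (dsetB (List.replicate LYn (List.replicate LXn (LXn * LYn + 1))) rx ry 0))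
      (dsetB (List.replicate LYn (List.replicate LXn (LXn * LYn + 1))) rx ry 0)
      (le_refl _) hInv0
    have hfix := bfLoop_fix board (LXn : Int) (LYn : Int) (LXn * LYn + 1) (bfScan LXn LYn)
      (pvGridSum (dsetB (List.replicate LYn (List.replicate LXn (LXn * LYn + 1))) rx ry 0))
      (dsetB (List.replicate LYn (List.replicate LXn (LXn * LYn + 1))) rx ry 0) (le_refl _)
    have hC := bf_complete board LXn LYn (rx, ry) (LXn * LYn + 1) hstart
      (bfLoop board (LXn : Int) (LYn : Int) (LXn * LYn + 1) (bfScan LXn LYn)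
        (dsetB (List.replicate LYn (List.replicate LXn (LXn * LYn + 1))) rx ry 0))
      hInvF.2.1 hInvF.2.2.1 hfix
    have hS := hInvF.2.2.2
    have hMain := pvMain board (LXn : Int) (LYn : Int)
      (zerosA (vsetA (List.replicate LYn (List.replicate LXn 0)) rx ry 1) + 1)
      [(rx, ry)] (vsetA (List.replicate LYn (List.replicate LXn 0)) rx ry 1)
      (bsetB (List.replicate LYn (List.replicate LXn false)) rx ry true) 0
      (by simp) (pvInitInv LXn LYn rx ry)
      (by
        intro c hc
        rw [List.mem_singleton] at hc
        subst hc
        exact pvInitLabel LXn LYn rx ry)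
    have hfront0 : ∀ c, c ∈ [((rx : Int), (ry : Int))] ↔
        (ReachL board (LXn : Int) (LYn : Int) (rx, ry) 0 c ∧
          ∀ k, k < 0 → ¬ ReachL board (LXn : Int) (LYn : Int) (rx, ry) k c) := by
      intro c
      constructor
      · intro hc
        rw [List.mem_singleton] at hc
        exact ⟨hc, fun k hk => absurd hk (by omega)⟩
      · rintro ⟨h, _⟩
        exact List.mem_singleton.mpr h
    have hvb0 : ∀ c, inbP (LXn : Int) (LYn : Int) c →
        (bgetB (bsetB (List.replicate LYn (List.replicate LXn false)) rx ry true) c.1 c.2 = true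
          ↔ ReachL board (LXn : Int) (LYn : Int) (rx, ry) 0 c) := by
      intro c hc
      exact pvInitVb LXn LYn (rx, ry) hstart c hc
    have hnoG0 : ∀ (k : Nat) (c : Int × Int), k < 0 →
        ReachL board (LXn : Int) (LYn : Int) (rx, ry) k c →
        boardAtB board c.1 c.2 ≠ 'G' := by
      intro k c hk
      exact absurd hk (by omega)
    have hsh0 : ShapeG LXn LYn
        (bsetB (List.replicate LYn (List.replicate LXn false)) rx ry true) :=
      shape_set LXn LYn _ rx.toNat ry.toNat true (shape_replicate LXn LYn false)
    have hK0 : [((rx : Int), (ry : Int))] ≠ [] →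
        0 + 1 + falsesB (bsetB (List.replicate LYn (List.replicate LXn false)) rx ry true)
          ≤ LXn * LYn := by
      intro _
      have hfalses : falsesB (bsetB (List.replicate LYn (List.replicate LXn false)) rx ry true)
          + 1 = LYn * LXn := pvInitFalses LXn LYn (rx, ry) hstart
      have hmc : LYn * LXn = LXn * LYn := Nat.mul_comm _ _
      omega
    have hLB := pvLevelToBF board LXn LYn (rx, ry)
      (bfLoop board (LXn : Int) (LYn : Int) (LXn * LYn + 1) (bfScan LXn LYn)
        (dsetB (List.replicate LYn (List.replicate LXn (LXn * LYn + 1))) rx ry 0))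
      hstart hS hC
      (falsesB (bsetB (List.replicate LYn (List.replicate LXn false)) rx ry true) + 1)
      [(rx, ry)] (bsetB (List.replicate LYn (List.replicate LXn false)) rx ry true) 0
      (by simp) hfront0 hvb0 hnoG0 hsh0 hK0
    exact hMain.trans hLB
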